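-- pv_equiv track=rewrite | github.com/temeddix/interview-practice | baekjoon/17142.py | find_min_time
-- ===== SOURCE A (Python) =====
-- from collections import deque
-- from itertools import combinations
-- from typing import NamedTuple
--
-- EMPTY_SYMBOL = 0
--
-- WALL_SYMBOL = 1
--
-- class Spot(NamedTuple):
--     row: int
--     column: int
--
-- class BlockMap(NamedTuple):
--     map_size: int
--     blocks: list[list[int]]
--     start_spots: list[Spot]
--
-- INFINITY = 1_000_000_007
--
-- def find_min_time(block_map: BlockMap, start_count: int) -> int | None:
--     _, _, start_spots = block_map
--
--     min_time = INFINITY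
--     for chosen_spots in combinations(start_spots, start_count):
--         spread_time = find_spread_time(block_map, list(chosen_spots))
--         if spread_time is not None:
--             min_time = min(min_time, spread_time)
--
--     return None if min_time == INFINITY else min_time
--
-- class Job(NamedTuple):
--     spot: Spot
--     spread_time: int
--
-- MOVEMENTS = [(-1, 0), (1, 0), (0, -1), (0, 1)]
--
-- def find_spread_time(block_map: BlockMap, chosen_spots: list[Spot]) -> int | None:
--     map_size, blocks, _ = block_map
--     visited = [[False for _ in r] for r in blocks]
--
--     bfs_deque = deque[Job]()
--     for chosen_spot in chosen_spots:
--         bfs_deque.append(Job(chosen_spot, 0))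
--
--     total_time = 0
--     while bfs_deque:
--         spot, spread_time = bfs_deque.popleft()
--         r, c = spot
--         if visited[r][c]:
--             continue
--         visited[r][c] = True
--         if blocks[r][c] == EMPTY_SYMBOL:
--             total_time = max(total_time, spread_time)
--         for r_diff, c_diff in MOVEMENTS:
--             r_new, c_new = r + r_diff, c + c_diff
--             if not 0 <= r_new < map_size or not 0 <= c_new < map_size:
--                 continue
--             if blocks[r_new][c_new] == WALL_SYMBOL or visited[r_new][c_new]:
--                 continue
--             bfs_deque.append(Job(Spot(r_new, c_new), spread_time + 1))
--
--     for r in range(map_size):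
--         for c in range(map_size):
--             if blocks[r][c] == EMPTY_SYMBOL and not visited[r][c]:
--                 return None
--
--     return total_time
-- ===== SOURCE B (Python) =====
-- from itertools import combinations
--
-- EMPTY_SYMBOL = 0
-- WALL_SYMBOL = 1
-- INFINITY = 1_000_000_007
-- MOVEMENTS = [(-1, 0), (1, 0), (0, -1), (0, 1)]
--
--
-- def bfs_distances(map_size, blocks, source):
--     """Single-source BFS distance grid; walls block, everything else is passable.
--
--     None marks a cell the source cannot reach."""
--     dist = [[None for _ in row] for row in blocks]
--     frontier = [source]
--     level = 0
--     while frontier: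
--         next_frontier = []
--         for r, c in frontier:
--             if dist[r][c] is not None:
--                 continue
--             dist[r][c] = level
--             for r_diff, c_diff in MOVEMENTS:
--                 r_new, c_new = r + r_diff, c + c_diff
--                 if (0 <= r_new < map_size and 0 <= c_new < map_size
--                         and blocks[r_new][c_new] != WALL_SYMBOL
--                         and dist[r_new][c_new] is None):
--                     next_frontier.append((r_new, c_new))
--         frontier = next_frontier
--         level += 1
--     return dist
--
--
-- def find_min_time(block_map, start_count):
--     map_size, blocks, start_spots = block_map
--     if start_count > len(start_spots):
--         return None
--     empties = [(r, c) for r in range(map_size) for c in range(map_size)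
--                if blocks[r][c] == EMPTY_SYMBOL]
--     dist_cache = {}
--     best = INFINITY
--     for chosen in combinations(start_spots, start_count):
--         grids = []
--         for spot in chosen:
--             if spot not in dist_cache:
--                 dist_cache[spot] = bfs_distances(map_size, blocks, spot)
--             grids.append(dist_cache[spot])
--         spread = 0
--         for r, c in empties:
--             cell = INFINITY
--             for grid in grids:
--                 d = grid[r][c]
--                 if d is not None and d < cell:
--                     cell = d
--             spread = max(spread, cell)
--         if spread < INFINITY:
--             best = min(best, spread)
--     return None if best == INFINITY else best
-- ===== Notes on version B (the rewrite author's own statement) =====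
-- stated objective: alternative
-- what changed: Instead of running one multi-source BFS per chosen subset, B precomputes (on demand, cached) a single-source BFS distance grid per candidate start spot and evaluates each subset by combining those grids: each empty cell's fill time is the minimum of the chosen sources' precomputed distances and the subset's spread time is the maximum over empty cells; the per-subset BFS disappears.
-- outside the precondition, e.g. on find_min_time((4, [[-1, -1, 0], [0]], [(-1, -1), (-1, -1)]), 0): A returns None, B raises IndexError
import Mathlib
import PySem

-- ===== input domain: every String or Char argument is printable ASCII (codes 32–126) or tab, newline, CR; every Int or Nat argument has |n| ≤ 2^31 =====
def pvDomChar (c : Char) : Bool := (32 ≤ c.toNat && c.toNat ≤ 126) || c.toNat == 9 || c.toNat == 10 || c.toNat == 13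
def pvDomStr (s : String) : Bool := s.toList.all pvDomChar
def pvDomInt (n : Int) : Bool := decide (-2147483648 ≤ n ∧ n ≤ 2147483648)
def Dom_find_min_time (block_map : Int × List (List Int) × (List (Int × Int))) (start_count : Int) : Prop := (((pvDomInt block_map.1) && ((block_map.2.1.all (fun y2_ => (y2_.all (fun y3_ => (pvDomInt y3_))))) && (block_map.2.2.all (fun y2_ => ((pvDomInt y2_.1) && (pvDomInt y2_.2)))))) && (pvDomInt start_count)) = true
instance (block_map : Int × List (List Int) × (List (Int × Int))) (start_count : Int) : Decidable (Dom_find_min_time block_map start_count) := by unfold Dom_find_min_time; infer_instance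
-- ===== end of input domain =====

-- B precomputes one cached single-source BFS distance grid per candidate start spot and scores
-- each subset by min/max combination of those grids instead of running a BFS per subset;
-- equal return value on Pre_ is proved below.

-- ===== PORT A =====
-- Grid helpers shared by the transliterations.  Indexing is via List.getD on n.toNat: exact
-- for the in-range, nonnegative indices guaranteed by Pre_.
def pvBGet (g : List (List Int)) (r c : Int) : Int := (g.getD r.toNat []).getD c.toNat 0

def pvVGet (g : List (List Bool)) (r c : Int) : Bool := (g.getD r.toNat []).getD c.toNat false

-- visited[r][c] = True
def pvVSet (g : List (List Bool)) (r c : Int) : List (List Bool) :=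
  g.set r.toNat ((g.getD r.toNat []).set c.toNat true)

def pvMovements : List (Int × Int) := [(-1, 0), (1, 0), (0, -1), (0, 1)]

-- the per-movement guard and append of A's inner `for r_diff, c_diff in MOVEMENTS` loop
def pvNbrs (n : Int) (blocks : List (List Int)) (vis : List (List Bool)) (r c : Int) :
    List (Int × Int) :=
  pvMovements.filterMap (fun d =>
    if 0 ≤ r + d.1 ∧ r + d.1 < n ∧ 0 ≤ c + d.2 ∧ c + d.2 < n ∧
        pvBGet blocks (r + d.1) (c + d.2) ≠ 1 ∧ pvVGet vis (r + d.1) (c + d.2) = false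
    then some (r + d.1, c + d.2) else none)

-- A's final `for r in range(map_size): for c in range(map_size): …` coverage scan
def pvCover (n : Int) (blocks : List (List Int)) (vis : List (List Bool)) : Bool :=
  (PySem.List.pyRange 0 n 1).all (fun r => (PySem.List.pyRange 0 n 1).all (fun c =>
    !(decide (pvBGet blocks r c = 0)) || pvVGet vis r c))

-- itertools.combinations(xs, k) in its lexicographic-by-position order
def pvCombos {α : Type} : Nat → List α → List (List α)
  | 0, _ => [[]]
  | _ + 1, [] => []
  | k + 1, x :: xs => (pvCombos k xs).map (fun t => x :: t) ++ pvCombos (k + 1) xs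

-- fuel bound for A's `while bfs_deque:` loop (a termination device only; proved sufficient below)
def pvCountFalse (g : List (List Bool)) : Nat := (g.map (fun row => row.countP (fun b => !b))).sum

-- A's `while bfs_deque:` loop; fuel exhaustion cannot occur for the fuel pvFstA passes
def pvBfsA (n : Int) (blocks : List (List Int)) :
    Nat → List ((Int × Int) × Int) → List (List Bool) → Int → List (List Bool) × Int
  | 0, _, vis, tot => (vis, tot)
  | _ + 1, [], vis, tot => (vis, tot)
  | f + 1, (s, t) :: q, vis, tot =>
    if pvVGet vis s.1 s.2 then pvBfsA n blocks f q vis tot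
    else
      let vis' := pvVSet vis s.1 s.2
      let tot' := if pvBGet blocks s.1 s.2 = 0 then max tot t else tot
      pvBfsA n blocks f (q ++ (pvNbrs n blocks vis' s.1 s.2).map (fun p => (p, t + 1))) vis' tot'

-- A's find_spread_time
def pvFstA (n : Int) (blocks : List (List Int)) (chosen : List (Int × Int)) : Option Int :=
  let vis0 := blocks.map (fun row => row.map (fun _ => false))
  let q0 := chosen.map (fun s => (s, (0 : Int)))
  match pvBfsA n blocks (q0.length + 5 * pvCountFalse vis0 + 1) q0 vis0 0 with
  | (vis, tot) => if pvCover n blocks vis then some tot else none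

def find_min_time (block_map : Int × List (List Int) × (List (Int × Int)))
    (start_count : Int) : Option Int :=
  let m := (pvCombos start_count.toNat block_map.2.2).foldl
    (fun acc ch => match pvFstA block_map.1 block_map.2.1 ch with
      | some t => min acc t
      | none => acc) 1000000007
  if m = 1000000007 then none else some m

-- ===== PORT B =====
-- dist[r][c] read / write (None = unreached)
def pvDGet (g : List (List (Option Int))) (r c : Int) : Option Int :=
  (g.getD r.toNat []).getD c.toNat none

def pvDSet (g : List (List (Option Int))) (r c : Int) (v : Int) : List (List (Option Int)) :=
  g.set r.toNat ((g.getD r.toNat []).set c.toNat (some v))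

-- the per-movement guard and append of B's inner `for r_diff, c_diff in MOVEMENTS` loop
def pvNbrsD (n : Int) (blocks : List (List Int)) (dist : List (List (Option Int))) (r c : Int) :
    List (Int × Int) :=
  pvMovements.filterMap (fun d =>
    if 0 ≤ r + d.1 ∧ r + d.1 < n ∧ 0 ≤ c + d.2 ∧ c + d.2 < n ∧
        pvBGet blocks (r + d.1) (c + d.2) ≠ 1 ∧ pvDGet dist (r + d.1) (c + d.2) = none
    then some (r + d.1, c + d.2) else none)

-- fuel bound for B's `while frontier:` loop (termination device only; proved sufficient below)
def pvCountNone (g : List (List (Option Int))) : Nat :=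
  (g.map (fun row => row.countP (fun o => o.isNone))).sum

-- B's `for r, c in frontier:` loop of one BFS level
def pvRunLevelD (n : Int) (blocks : List (List Int)) :
    List (Int × Int) → List (Int × Int) → List (List (Option Int)) → Int →
    List (Int × Int) × List (List (Option Int))
  | [], next, dist, _ => (next, dist)
  | s :: cur, next, dist, lvl =>
    if (pvDGet dist s.1 s.2).isSome then pvRunLevelD n blocks cur next dist lvl
    else
      let dist' := pvDSet dist s.1 s.2 lvl
      pvRunLevelD n blocks cur (next ++ pvNbrsD n blocks dist' s.1 s.2) dist' lvl

-- B's `while frontier:` loop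
def pvLevelsD (n : Int) (blocks : List (List Int)) :
    Nat → List (Int × Int) → List (List (Option Int)) → Int → List (List (Option Int))
  | 0, _, dist, _ => dist
  | _ + 1, [], dist, _ => dist
  | f + 1, s :: fr, dist, lvl =>
    match pvRunLevelD n blocks (s :: fr) [] dist lvl with
    | (next, dist') => pvLevelsD n blocks f next dist' (lvl + 1)

-- B's bfs_distances
def pvBfsDistances (n : Int) (blocks : List (List Int)) (source : Int × Int) :
    List (List (Option Int)) :=
  let dist0 := blocks.map (fun row => row.map (fun _ => (none : Option Int)))
  pvLevelsD n blocks (pvCountNone dist0 + 1) [source] dist0 0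

-- B's `empties` comprehension
def pvEmpties (n : Int) (blocks : List (List Int)) : List (Int × Int) :=
  (PySem.List.pyRange 0 n 1).flatMap (fun r =>
    (PySem.List.pyRange 0 n 1).filterMap (fun c =>
      if pvBGet blocks r c = 0 then some (r, c) else none))

-- B's `for spot in chosen:` cache-filling loop ('if spot not in dist_cache: …; grids.append(…)'
-- transliterated as the equivalent single get? match)
def pvGrids (n : Int) (blocks : List (List Int))
    (st : PySem.Dict (Int × Int) (List (List (Option Int))) × List (List (List (Option Int))))
    (chosen : List (Int × Int)) :
    PySem.Dict (Int × Int) (List (List (Option Int))) × List (List (List (Option Int))) :=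
  chosen.foldl (fun p s =>
    match p.1.get? s with
    | some g => (p.1, p.2 ++ [g])
    | none =>
      let g := pvBfsDistances n blocks s
      (p.1.insert s g, p.2 ++ [g])) st

def find_min_time_alt (block_map : Int × List (List Int) × (List (Int × Int)))
    (start_count : Int) : Option Int :=
  if ((block_map.2.2.length : Int)) < start_count then none else
  let n := block_map.1
  let blocks := block_map.2.1
  let empties := pvEmpties n blocks
  let res := (pvCombos start_count.toNat block_map.2.2).foldl
    (fun (st : PySem.Dict (Int × Int) (List (List (Option Int))) × Int) chosen =>
      let cg := pvGrids n blocks (st.1, []) chosen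
      let spread := empties.foldl (fun sp v =>
        max sp (cg.2.foldl (fun cell g =>
          match pvDGet g v.1 v.2 with
          | some d => if d < cell then d else cell
          | none => cell) (1000000007 : Int))) (0 : Int)
      (cg.1, if spread < 1000000007 then min st.2 spread else st.2))
    (PySem.Dict.empty, 1000000007)
  if res.2 = 1000000007 then none else some res.2

-- ===== PRECONDITION & SPEC =====
-- Pre_ excludes the ill-shaped inputs (negative start_count → ValueError; a grid smaller than
-- map_size, or start spots outside [0, map_size)² → IndexError on most of them) on which A
-- raises; on the few such inputs where Python's negative/short-grid indexing happens to land
-- inside the grid A returns a value that is an accident of index wraparound.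
def Pre_find_min_time (block_map : Int × List (List Int) × (List (Int × Int)))
    (start_count : Int) : Prop :=
  (0 ≤ start_count ∧ 0 ≤ block_map.1 ∧ block_map.1 ≤ (block_map.2.1.length : Int) ∧
    (∀ row ∈ block_map.2.1.take block_map.1.toNat, block_map.1 ≤ (row.length : Int)) ∧
    (∀ p ∈ block_map.2.2, 0 ≤ p.1 ∧ p.1 < block_map.1 ∧ 0 ≤ p.2 ∧ p.2 < block_map.1))
  ∨ (0 ≤ start_count ∧ (block_map.2.2.length : Int) < start_count)
  ∨ (start_count = 0 ∧ block_map.1 ≤ 0)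

instance (block_map : Int × List (List Int) × (List (Int × Int))) (start_count : Int) :
    Decidable (Pre_find_min_time block_map start_count) := by
  unfold Pre_find_min_time; infer_instance

def pvWitness_find_min_time : (Int × List (List Int) × (List (Int × Int))) × Int :=
  ((2, [[0, 0], [2, 1]], [(1, 0)]), 1)

def Spec_find_min_time (block_map : Int × List (List Int) × (List (Int × Int)))
    (start_count : Int) (out : Option Int) : Prop :=
  out = find_min_time_alt block_map start_count

instance (block_map : Int × List (List Int) × (List (Int × Int))) (start_count : Int)
    (out : Option Int) : Decidable (Spec_find_min_time block_map start_count out) := by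
  unfold Spec_find_min_time; infer_instance

-- ===== CLAIM (what is proved, stated in full; the proofs are below) =====
def Claim_equal_find_min_time : Prop :=
  ∀ (block_map : Int × List (List Int) × (List (Int × Int))) (start_count : Int),
    Dom_find_min_time block_map start_count → Pre_find_min_time block_map start_count →
      Spec_find_min_time block_map start_count (find_min_time block_map start_count)

-- ===== LEMMAS AND PROOFS =====


def pvInR (n : Int) (p : Int × Int) : Prop := 0 ≤ p.1 ∧ p.1 < n ∧ 0 ≤ p.2 ∧ p.2 < n

def pvSh (n : Int) (vis : List (List Bool)) : Prop :=
  n ≤ (vis.length : Int) ∧ ∀ i : Nat, (i : Int) < n → n ≤ ((vis.getD i []).length : Int)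

def pvShD (n : Int) (g : List (List (Option Int))) : Prop :=
  n ≤ (g.length : Int) ∧ ∀ i : Nat, (i : Int) < n → n ≤ ((g.getD i []).length : Int)

-- the set of passable in-range neighbours of a cell (A's and B's movement guard, minus the
-- visited/dist test)
def pvAdj (n : Int) (blocks : List (List Int)) (p : Int × Int) : List (Int × Int) :=
  pvMovements.filterMap (fun d =>
    if 0 ≤ p.1 + d.1 ∧ p.1 + d.1 < n ∧ 0 ≤ p.2 + d.2 ∧ p.2 + d.2 < n ∧
        pvBGet blocks (p.1 + d.1) (p.2 + d.2) ≠ 1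
    then some (p.1 + d.1, p.2 + d.2) else none)

def pvStep (n : Int) (blocks : List (List Int)) (X : List (Int × Int)) : List (Int × Int) :=
  X ++ X.flatMap (pvAdj n blocks)

-- cumulative reachability list: cells reachable from S in at most t steps
def pvRL (n : Int) (blocks : List (List Int)) (S : List (Int × Int)) : Nat → List (Int × Int)
  | 0 => S
  | t + 1 => pvStep n blocks (pvRL n blocks S t)

def pvVp (n : Int) (blocks : List (List Int)) (S : List (Int × Int)) (t : Nat)
    (v : Int × Int) : Prop := ∃ i < t, v ∈ pvRL n blocks S i

def pvFirstAt (n : Int) (blocks : List (List Int)) (S : List (Int × Int)) (d : Nat)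
    (v : Int × Int) : Prop := v ∈ pvRL n blocks S d ∧ ∀ i < d, v ∉ pvRL n blocks S i

def pvEver (n : Int) (blocks : List (List Int)) (S : List (Int × Int)) (v : Int × Int) : Prop :=
  ∃ i, v ∈ pvRL n blocks S i

def pvStopped (n : Int) (blocks : List (List Int)) (S : List (Int × Int)) (T : Nat) : Prop :=
  ∀ v ∈ pvRL n blocks S T, pvVp n blocks S T v

-- "some empty cell is first reached exactly at level t"
def pvNewEmptyB (n : Int) (blocks : List (List Int)) (S : List (Int × Int)) (t : Nat) : Bool :=
  (pvRL n blocks S t).any (fun v => decide (pvBGet blocks v.1 v.2 = 0) &&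
    (List.range t).all (fun i => !decide (v ∈ pvRL n blocks S i)))

def pvTotSpec (n : Int) (blocks : List (List Int)) (S : List (Int × Int)) : Nat → Int
  | 0 => 0
  | t + 1 => if pvNewEmptyB n blocks S t then max (pvTotSpec n blocks S t) (t : Int)
             else pvTotSpec n blocks S t

-- the first level at which S reaches v (INFINITY if never)
noncomputable def pvFlvI (n : Int) (blocks : List (List Int)) (S : List (Int × Int))
    (v : Int × Int) : Int :=
  haveI : Decidable (pvEver n blocks S v) := Classical.propDecidable _
  if h : pvEver n blocks S v then ((Nat.find h : Nat) : Int) else 1000000007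

-- A's level-synchronous reformulation of the deque BFS (proof device)
def pvRunLevel (n : Int) (blocks : List (List Int)) :
    List (Int × Int) → List (Int × Int) → List (List Bool) → Int → Int →
    List (Int × Int) × List (List Bool) × Int
  | [], next, vis, tot, _ => (next, vis, tot)
  | s :: cur, next, vis, tot, t =>
    if pvVGet vis s.1 s.2 then pvRunLevel n blocks cur next vis tot t
    else
      let vis' := pvVSet vis s.1 s.2
      let tot' := if pvBGet blocks s.1 s.2 = 0 then max tot t else tot
      pvRunLevel n blocks cur (next ++ pvNbrs n blocks vis' s.1 s.2) vis' tot' t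

def pvLevels (n : Int) (blocks : List (List Int)) :
    Nat → List (Int × Int) → List (List Bool) → Int → Int → List (List Bool) × Int
  | 0, _, vis, tot, _ => (vis, tot)
  | _ + 1, [], vis, tot, _ => (vis, tot)
  | f + 1, s :: fr, vis, tot, t =>
    match pvRunLevel n blocks (s :: fr) [] vis tot t with
    | (next, vis', tot') => pvLevels n blocks f next vis' tot' (t + 1)

-- ---------- grid bookkeeping (visited grid) ----------

theorem pvVSet_length (g : List (List Bool)) (r c : Int) :
    (pvVSet g r c).length = g.length := by simp [pvVSet]

theorem pvVSet_row_length (g : List (List Bool)) (r c : Int) (i : Nat) :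
    ((pvVSet g r c).getD i []).length = (g.getD i []).length := by
  unfold pvVSet
  by_cases h : i = r.toNat
  · by_cases hr : r.toNat < g.length
    · subst h
      simp [List.getD_eq_getElem?_getD, List.getElem?_set_self hr]
    · rw [List.set_eq_of_length_le (by omega)]
  · rw [List.getD_eq_getElem?_getD, List.getElem?_set_ne (by omega),
      ← List.getD_eq_getElem?_getD]

theorem pvSh_vset (n : Int) (g : List (List Bool)) (r c : Int) (h : pvSh n g) :
    pvSh n (pvVSet g r c) := by
  refine ⟨by rw [pvVSet_length]; exact h.1, fun i hi => ?_⟩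
  rw [pvVSet_row_length]; exact h.2 i hi

theorem pvRowCount (row : List Bool) : ∀ (c : Nat), c < row.length → row.getD c false = false →
    (row.set c true).countP (fun b => !b) + 1 = row.countP (fun b => !b) := by
  induction row with
  | nil => intro c hc _; simp at hc
  | cons b bs ih =>
    intro c hc hf
    cases c with
    | zero => simp_all
    | succ c =>
      simp only [List.set_cons_succ, List.countP_cons]
      have := ih c (by simpa using hc) (by simpa using hf)
      omega

theorem pvGridCount (g : List (List Bool)) : ∀ (r c : Nat), r < g.length →
    c < (g.getD r []).length → (g.getD r []).getD c false = false →
    pvCountFalse (g.set r ((g.getD r []).set c true)) + 1 = pvCountFalse g := by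
  induction g with
  | nil => intro r c hr; simp at hr
  | cons row rest ih =>
    intro r c hr hc hf
    cases r with
    | zero =>
      simp only [List.getD_cons_zero] at hc hf ⊢
      simp only [List.set_cons_zero, pvCountFalse, List.map_cons, List.sum_cons]
      have := pvRowCount row c hc hf
      omega
    | succ r =>
      simp only [List.getD_cons_succ] at hc hf ⊢
      simp only [List.set_cons_succ, pvCountFalse, List.map_cons, List.sum_cons]
      have := ih r c (by simpa using hr) hc hf
      simp only [pvCountFalse] at this
      omega

theorem pvCountFalse_mark (n : Int) (vis : List (List Bool)) (p : Int × Int)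
    (hsh : pvSh n vis) (hin : pvInR n p) (hf : pvVGet vis p.1 p.2 = false) :
    pvCountFalse (pvVSet vis p.1 p.2) + 1 = pvCountFalse vis := by
  obtain ⟨h1, h2, h3, h4⟩ := hin
  have hr : p.1.toNat < vis.length := by
    have := hsh.1; omega
  have hrow := hsh.2 p.1.toNat (by omega)
  have hc : p.2.toNat < (vis.getD p.1.toNat []).length := by omega
  exact pvGridCount vis p.1.toNat p.2.toNat hr hc hf

theorem pvNbrs_len (n : Int) (blocks : List (List Int)) (vis : List (List Bool)) (r c : Int) :
    (pvNbrs n blocks vis r c).length ≤ 4 := by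
  unfold pvNbrs
  exact le_trans (List.length_filterMap_le _ _) (by simp [pvMovements])

theorem pvNbrs_inR (n : Int) (blocks : List (List Int)) (vis : List (List Bool)) (r c : Int)
    (q : Int × Int) (hq : q ∈ pvNbrs n blocks vis r c) : pvInR n q := by
  unfold pvNbrs at hq
  rcases List.mem_filterMap.1 hq with ⟨d, _, hd⟩
  split at hd
  · rename_i hcond
    cases hd
    exact ⟨hcond.1, hcond.2.1, hcond.2.2.1, hcond.2.2.2.1⟩
  · cases hd

theorem pvRunLevel_spec (n : Int) (blocks : List (List Int)) :
    ∀ (cur next : List (Int × Int)) (vis : List (List Bool)) (tot t : Int),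
    pvSh n vis → (∀ p ∈ cur, pvInR n p) → (∀ p ∈ next, pvInR n p) →
    pvSh n (pvRunLevel n blocks cur next vis tot t).2.1 ∧
    (∀ p ∈ (pvRunLevel n blocks cur next vis tot t).1, pvInR n p) ∧
    pvCountFalse (pvRunLevel n blocks cur next vis tot t).2.1 ≤ pvCountFalse vis ∧
    (pvRunLevel n blocks cur next vis tot t).1.length +
        4 * pvCountFalse (pvRunLevel n blocks cur next vis tot t).2.1 ≤
      next.length + 4 * pvCountFalse vis := by
  intro cur
  induction cur with
  | nil =>
    intro next vis tot t hsh _ hnext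
    exact ⟨hsh, hnext, le_refl _, by simp [pvRunLevel]⟩
  | cons s cur ih =>
    intro next vis tot t hsh hcur hnext
    simp only [pvRunLevel]
    split
    · exact ih next vis tot t hsh (fun p hp => hcur p (List.mem_cons_of_mem _ hp)) hnext
    · rename_i hvg
      have hins : pvInR n s := hcur s List.mem_cons_self
      have hmark := pvCountFalse_mark n vis s hsh hins (by simpa using hvg)
      have hsh' := pvSh_vset n vis s.1 s.2 hsh
      have hnext' : ∀ p ∈ next ++ pvNbrs n blocks (pvVSet vis s.1 s.2) s.1 s.2, pvInR n p := by
        intro p hp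
        rcases List.mem_append.1 hp with h | h
        · exact hnext p h
        · exact pvNbrs_inR n blocks _ s.1 s.2 p h
      have := ih (next ++ pvNbrs n blocks (pvVSet vis s.1 s.2) s.1 s.2) (pvVSet vis s.1 s.2)
        (if pvBGet blocks s.1 s.2 = 0 then max tot t else tot) t hsh'
        (fun p hp => hcur p (List.mem_cons_of_mem _ hp)) hnext'
      refine ⟨this.1, this.2.1, by omega, ?_⟩
      have hlen := pvNbrs_len n blocks (pvVSet vis s.1 s.2) s.1 s.2
      have h4 := this.2.2.2
      rw [List.length_append] at h4
      omega

theorem pvL1 (n : Int) (blocks : List (List Int)) :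
    ∀ (cur next : List (Int × Int)) (vis : List (List Bool)) (tot t : Int) (f : Nat),
    cur.length ≤ f →
    pvBfsA n blocks f
        (cur.map (fun p => (p, t)) ++ next.map (fun p => (p, t + 1))) vis tot
      = pvBfsA n blocks (f - cur.length)
          ((pvRunLevel n blocks cur next vis tot t).1.map (fun p => (p, t + 1)))
          (pvRunLevel n blocks cur next vis tot t).2.1
          (pvRunLevel n blocks cur next vis tot t).2.2 := by
  intro cur
  induction cur with
  | nil => intro next vis tot t f _; simp [pvRunLevel]
  | cons s cur ih =>
    intro next vis tot t f hf
    cases f with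
    | zero => simp at hf
    | succ f =>
      simp only [List.map_cons, List.cons_append, pvBfsA, pvRunLevel]
      split
      · have := ih next vis tot t f (by simpa using hf)
        simpa using this
      · have := ih (next ++ pvNbrs n blocks (pvVSet vis s.1 s.2) s.1 s.2) (pvVSet vis s.1 s.2)
          (if pvBGet blocks s.1 s.2 = 0 then max tot t else tot) t f (by simpa using hf)
        rw [List.map_append] at this
        simpa [List.append_assoc, Nat.succ_sub_succ] using this

theorem pvBfsA_nil (n : Int) (blocks : List (List Int)) (f : Nat) (vis : List (List Bool))
    (tot : Int) : pvBfsA n blocks f [] vis tot = (vis, tot) := by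
  cases f <;> rfl

theorem pvLevels_nil (n : Int) (blocks : List (List Int)) (k : Nat) (vis : List (List Bool))
    (tot t : Int) : pvLevels n blocks k [] vis tot t = (vis, tot) := by
  cases k <;> rfl

theorem pvL2 (n : Int) (blocks : List (List Int)) :
    ∀ (k : Nat) (fr : List (Int × Int)) (vis : List (List Bool)) (tot t : Int) (f : Nat),
    pvSh n vis → (∀ p ∈ fr, pvInR n p) →
    fr.length + 5 * pvCountFalse vis ≤ f → pvCountFalse vis < k →
    pvBfsA n blocks f (fr.map (fun p => (p, t))) vis tot = pvLevels n blocks k fr vis tot t := by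
  intro k
  induction k with
  | zero => intro fr vis tot t f _ _ _ hk; omega
  | succ k ih =>
    intro fr vis tot t f hsh hfr hf hk
    cases fr with
    | nil =>
      rw [pvLevels_nil]
      cases f <;> rfl
    | cons s fr =>
      have hq : (s :: fr).map (fun p => (p, t)) =
          (s :: fr).map (fun p => (p, t)) ++ ([] : List (Int × Int)).map (fun p => (p, t + 1)) := by
        simp
      rw [hq, pvL1 n blocks (s :: fr) [] vis tot t f (by simp at hf ⊢; omega)]
      have hspec := pvRunLevel_spec n blocks (s :: fr) [] vis tot t hsh hfr (by simp)
      obtain ⟨hsh', hin', hle', hlen'⟩ := hspec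
      simp only [pvLevels]
      rcases hrl : pvRunLevel n blocks (s :: fr) [] vis tot t with ⟨next', vis', tot'⟩
      rw [hrl] at hsh' hin' hle' hlen'
      simp only at hsh' hin' hle' hlen' ⊢
      cases next' with
      | nil =>
        rw [pvLevels_nil]
        simp only [List.map_nil]
        rw [pvBfsA_nil]
      | cons a next'' =>
        apply ih
        · exact hsh'
        · exact hin'
        · simp at hlen' hf ⊢
          omega
        · simp at hlen'
          omega

theorem pvCombos_mem (α : Type) : ∀ (xs : List α) (k : Nat) (ch : List α),
    ch ∈ pvCombos k xs → ∀ p ∈ ch, p ∈ xs := by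
  intro xs
  induction xs with
  | nil =>
    intro k ch hch
    cases k with
    | zero => simp [pvCombos] at hch; subst hch; simp
    | succ k => simp [pvCombos] at hch
  | cons x xs ih =>
    intro k ch hch p hp
    cases k with
    | zero => simp [pvCombos] at hch; subst hch; simp at hp
    | succ k =>
      simp only [pvCombos, List.mem_append, List.mem_map] at hch
      rcases hch with ⟨t, ht, rfl⟩ | h
      · rcases List.mem_cons.1 hp with rfl | hp'
        · exact List.mem_cons_self
        · exact List.mem_cons_of_mem _ (ih k t ht p hp')
      · exact List.mem_cons_of_mem _ (ih (k + 1) ch h p hp)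

theorem pvCombos_nil (α : Type) : ∀ (xs : List α) (k : Nat),
    xs.length < k → pvCombos k xs = [] := by
  intro xs
  induction xs with
  | nil => intro k hk; cases k with
    | zero => simp at hk
    | succ k => rfl
  | cons x xs ih =>
    intro k hk
    cases k with
    | zero => simp at hk
    | succ k =>
      simp only [pvCombos]
      rw [ih k (by simpa using hk), ih (k + 1) (by simp at hk ⊢; omega)]
      simp

-- ---------- grid bookkeeping (distance grid) ----------

theorem pvDSet_length (g : List (List (Option Int))) (r c : Int) (v : Int) :
    (pvDSet g r c v).length = g.length := by simp [pvDSet]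

theorem pvDSet_row_length (g : List (List (Option Int))) (r c : Int) (v : Int) (i : Nat) :
    ((pvDSet g r c v).getD i []).length = (g.getD i []).length := by
  unfold pvDSet
  by_cases h : i = r.toNat
  · by_cases hr : r.toNat < g.length
    · subst h
      simp [List.getD_eq_getElem?_getD, List.getElem?_set_self hr]
    · rw [List.set_eq_of_length_le (by omega)]
  · rw [List.getD_eq_getElem?_getD, List.getElem?_set_ne (by omega),
      ← List.getD_eq_getElem?_getD]

theorem pvShD_dset (n : Int) (g : List (List (Option Int))) (r c : Int) (v : Int)
    (h : pvShD n g) : pvShD n (pvDSet g r c v) := by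
  refine ⟨by rw [pvDSet_length]; exact h.1, fun i hi => ?_⟩
  rw [pvDSet_row_length]; exact h.2 i hi

theorem pvRowCountD (row : List (Option Int)) (v : Int) : ∀ (c : Nat), c < row.length →
    row.getD c none = none →
    (row.set c (some v)).countP (fun o => o.isNone) + 1 = row.countP (fun o => o.isNone) := by
  induction row with
  | nil => intro c hc _; simp at hc
  | cons b bs ih =>
    intro c hc hf
    cases c with
    | zero => simp_all
    | succ c =>
      simp only [List.set_cons_succ, List.countP_cons]
      have := ih c (by simpa using hc) (by simpa using hf)
      omega

theorem pvGridCountD (g : List (List (Option Int))) (v : Int) : ∀ (r c : Nat), r < g.length →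
    c < (g.getD r []).length → (g.getD r []).getD c none = none →
    pvCountNone (g.set r ((g.getD r []).set c (some v))) + 1 = pvCountNone g := by
  induction g with
  | nil => intro r c hr; simp at hr
  | cons row rest ih =>
    intro r c hr hc hf
    cases r with
    | zero =>
      simp only [List.getD_cons_zero] at hc hf ⊢
      simp only [List.set_cons_zero, pvCountNone, List.map_cons, List.sum_cons]
      have := pvRowCountD row v c hc hf
      omega
    | succ r =>
      simp only [List.getD_cons_succ] at hc hf ⊢
      simp only [List.set_cons_succ, pvCountNone, List.map_cons, List.sum_cons]
      have := ih r c (by simpa using hr) hc hf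
      simp only [pvCountNone] at this
      omega

theorem pvCountNone_mark (n : Int) (g : List (List (Option Int))) (p : Int × Int) (v : Int)
    (hsh : pvShD n g) (hin : pvInR n p) (hf : pvDGet g p.1 p.2 = none) :
    pvCountNone (pvDSet g p.1 p.2 v) + 1 = pvCountNone g := by
  obtain ⟨h1, h2, h3, h4⟩ := hin
  have hr : p.1.toNat < g.length := by
    have := hsh.1; omega
  have hrow := hsh.2 p.1.toNat (by omega)
  have hc : p.2.toNat < (g.getD p.1.toNat []).length := by omega
  exact pvGridCountD g v p.1.toNat p.2.toNat hr hc hf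

theorem pvNbrsD_len (n : Int) (blocks : List (List Int)) (g : List (List (Option Int)))
    (r c : Int) : (pvNbrsD n blocks g r c).length ≤ 4 := by
  unfold pvNbrsD
  exact le_trans (List.length_filterMap_le _ _) (by simp [pvMovements])

theorem pvNbrsD_inR (n : Int) (blocks : List (List Int)) (g : List (List (Option Int)))
    (r c : Int) (q : Int × Int) (hq : q ∈ pvNbrsD n blocks g r c) : pvInR n q := by
  unfold pvNbrsD at hq
  rcases List.mem_filterMap.1 hq with ⟨d, _, hd⟩
  split at hd
  · rename_i hcond
    cases hd
    exact ⟨hcond.1, hcond.2.1, hcond.2.2.1, hcond.2.2.2.1⟩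
  · cases hd

theorem pvRunLevelD_spec (n : Int) (blocks : List (List Int)) :
    ∀ (cur next : List (Int × Int)) (g : List (List (Option Int))) (lvl : Int),
    pvShD n g → (∀ p ∈ cur, pvInR n p) → (∀ p ∈ next, pvInR n p) →
    pvShD n (pvRunLevelD n blocks cur next g lvl).2 ∧
    (∀ p ∈ (pvRunLevelD n blocks cur next g lvl).1, pvInR n p) ∧
    pvCountNone (pvRunLevelD n blocks cur next g lvl).2 ≤ pvCountNone g ∧
    (pvRunLevelD n blocks cur next g lvl).1.length +
        4 * pvCountNone (pvRunLevelD n blocks cur next g lvl).2 ≤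
      next.length + 4 * pvCountNone g := by
  intro cur
  induction cur with
  | nil =>
    intro next g lvl hsh _ hnext
    exact ⟨hsh, hnext, le_refl _, by simp [pvRunLevelD]⟩
  | cons s cur ih =>
    intro next g lvl hsh hcur hnext
    simp only [pvRunLevelD]
    split
    · exact ih next g lvl hsh (fun p hp => hcur p (List.mem_cons_of_mem _ hp)) hnext
    · rename_i hvg
      have hins : pvInR n s := hcur s List.mem_cons_self
      have hnone : pvDGet g s.1 s.2 = none := by
        cases hh : pvDGet g s.1 s.2 with
        | none => rfl
        | some d => rw [hh] at hvg; simp at hvg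
      have hmark := pvCountNone_mark n g s lvl hsh hins hnone
      have hsh' := pvShD_dset n g s.1 s.2 lvl hsh
      have hnext' : ∀ p ∈ next ++ pvNbrsD n blocks (pvDSet g s.1 s.2 lvl) s.1 s.2, pvInR n p := by
        intro p hp
        rcases List.mem_append.1 hp with h | h
        · exact hnext p h
        · exact pvNbrsD_inR n blocks _ s.1 s.2 p h
      have := ih (next ++ pvNbrsD n blocks (pvDSet g s.1 s.2 lvl) s.1 s.2)
        (pvDSet g s.1 s.2 lvl) lvl hsh' (fun p hp => hcur p (List.mem_cons_of_mem _ hp)) hnext'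
      refine ⟨this.1, this.2.1, by omega, ?_⟩
      have hlen := pvNbrsD_len n blocks (pvDSet g s.1 s.2 lvl) s.1 s.2
      have h4 := this.2.2.2
      rw [List.length_append] at h4
      omega

theorem pvLevelsD_nil (n : Int) (blocks : List (List Int)) (k : Nat)
    (g : List (List (Option Int))) (lvl : Int) : pvLevelsD n blocks k [] g lvl = g := by
  cases k <;> rfl

-- ---------- reachability theory ----------

theorem mem_pvStep (n : Int) (blocks : List (List Int)) (X : List (Int × Int)) (v : Int × Int) :
    v ∈ pvStep n blocks X ↔ v ∈ X ∨ ∃ u ∈ X, v ∈ pvAdj n blocks u := by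
  simp [pvStep, List.mem_append, List.mem_flatMap]

theorem mem_pvRL_succ (n : Int) (blocks : List (List Int)) (S : List (Int × Int)) (t : Nat)
    (v : Int × Int) :
    v ∈ pvRL n blocks S (t + 1) ↔ v ∈ pvRL n blocks S t ∨
      ∃ u ∈ pvRL n blocks S t, v ∈ pvAdj n blocks u := by
  rw [show pvRL n blocks S (t + 1) = pvStep n blocks (pvRL n blocks S t) from rfl]
  exact mem_pvStep n blocks _ v

theorem pvRL_mono_succ (n : Int) (blocks : List (List Int)) (S : List (Int × Int)) (t : Nat)
    (v : Int × Int) (h : v ∈ pvRL n blocks S t) : v ∈ pvRL n blocks S (t + 1) :=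
  (mem_pvRL_succ n blocks S t v).2 (Or.inl h)

theorem pvRL_mono (n : Int) (blocks : List (List Int)) (S : List (Int × Int)) {t u : Nat}
    (htu : t ≤ u) (v : Int × Int) (h : v ∈ pvRL n blocks S t) : v ∈ pvRL n blocks S u := by
  induction u with
  | zero => rw [Nat.le_zero.1 htu] at h; exact h
  | succ u ih =>
    rcases Nat.lt_or_ge t (u + 1) with hlt | hge
    · exact pvRL_mono_succ n blocks S u v (ih (by omega))
    · rw [show t = u + 1 by omega] at h; exact h

theorem pvVp_mem (n : Int) (blocks : List (List Int)) (S : List (Int × Int)) (t : Nat)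
    (v : Int × Int) (h : pvVp n blocks S t v) : v ∈ pvRL n blocks S t := by
  rcases h with ⟨i, hi, hmem⟩
  exact pvRL_mono n blocks S (by omega) v hmem

theorem pvVp_succ_iff (n : Int) (blocks : List (List Int)) (S : List (Int × Int)) (t : Nat)
    (v : Int × Int) : pvVp n blocks S (t + 1) v ↔ v ∈ pvRL n blocks S t := by
  constructor
  · rintro ⟨i, hi, hmem⟩
    exact pvRL_mono n blocks S (by omega) v hmem
  · intro h
    exact ⟨t, by omega, h⟩

theorem pvAdj_inR (n : Int) (blocks : List (List Int)) (u v : Int × Int)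
    (h : v ∈ pvAdj n blocks u) : pvInR n v ∧ pvBGet blocks v.1 v.2 ≠ 1 := by
  unfold pvAdj at h
  rcases List.mem_filterMap.1 h with ⟨d, _, hd⟩
  split at hd
  · rename_i hcond
    cases hd
    exact ⟨⟨hcond.1, hcond.2.1, hcond.2.2.1, hcond.2.2.2.1⟩, hcond.2.2.2.2⟩
  · cases hd

theorem pvRL_inR (n : Int) (blocks : List (List Int)) (S : List (Int × Int))
    (hS : ∀ s ∈ S, pvInR n s) : ∀ (t : Nat), ∀ v ∈ pvRL n blocks S t, pvInR n v := by
  intro t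
  induction t with
  | zero => exact hS
  | succ t ih =>
    intro v hv
    rcases (mem_pvRL_succ n blocks S t v).1 hv with h | ⟨u, _, hadj⟩
    · exact ih v h
    · exact (pvAdj_inR n blocks u v hadj).1

theorem pvRL_nil (n : Int) (blocks : List (List Int)) : ∀ (t : Nat),
    pvRL n blocks [] t = [] := by
  intro t
  induction t with
  | zero => rfl
  | succ t ih => simp [pvRL, pvStep, ih]

theorem pvRL_append (n : Int) (blocks : List (List Int)) (S₁ S₂ : List (Int × Int)) :
    ∀ (t : Nat) (v : Int × Int),
    v ∈ pvRL n blocks (S₁ ++ S₂) t ↔ v ∈ pvRL n blocks S₁ t ∨ v ∈ pvRL n blocks S₂ t := by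
  intro t
  induction t with
  | zero => intro v; simp [pvRL]
  | succ t ih =>
    intro v
    rw [mem_pvRL_succ, mem_pvRL_succ, mem_pvRL_succ]
    constructor
    · rintro (h | ⟨u, hu, hadj⟩)
      · rcases (ih v).1 h with h1 | h2
        · exact Or.inl (Or.inl h1)
        · exact Or.inr (Or.inl h2)
      · rcases (ih u).1 hu with h1 | h2
        · exact Or.inl (Or.inr ⟨u, h1, hadj⟩)
        · exact Or.inr (Or.inr ⟨u, h2, hadj⟩)
    · rintro ((h | ⟨u, hu, hadj⟩) | (h | ⟨u, hu, hadj⟩))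
      · exact Or.inl ((ih v).2 (Or.inl h))
      · exact Or.inr ⟨u, (ih u).2 (Or.inl hu), hadj⟩
      · exact Or.inl ((ih v).2 (Or.inr h))
      · exact Or.inr ⟨u, (ih u).2 (Or.inr hu), hadj⟩

theorem pvRL_single (n : Int) (blocks : List (List Int)) :
    ∀ (S : List (Int × Int)) (t : Nat) (v : Int × Int),
    v ∈ pvRL n blocks S t ↔ ∃ s ∈ S, v ∈ pvRL n blocks [s] t := by
  intro S
  induction S with
  | nil => intro t v; rw [pvRL_nil]; simp
  | cons s S ih =>
    intro t v
    have : s :: S = [s] ++ S := rfl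
    rw [this, pvRL_append]
    constructor
    · rintro (h | h)
      · exact ⟨s, by simp, h⟩
      · rcases (ih t v).1 h with ⟨s', hs', h'⟩
        exact ⟨s', by simp [hs'], h'⟩
    · rintro ⟨s', hs', h'⟩
      rcases List.mem_cons.1 hs' with rfl | hs'
      · exact Or.inl h'
      · exact Or.inr ((ih t v).2 ⟨s', hs', h'⟩)

theorem pvStopped_mem (n : Int) (blocks : List (List Int)) (S : List (Int × Int)) (T : Nat)
    (hstop : pvStopped n blocks S T) : ∀ (j : Nat), ∀ v ∈ pvRL n blocks S j,
      v ∈ pvRL n blocks S T := by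
  intro j
  induction j with
  | zero => intro v hv; exact pvRL_mono n blocks S (Nat.zero_le T) v hv
  | succ j ih =>
    intro v hv
    rcases (mem_pvRL_succ n blocks S j v).1 hv with h | ⟨u, hu, hadj⟩
    · exact ih v h
    · have huT := ih u hu
      rcases hstop u huT with ⟨i, hi, hui⟩
      have : v ∈ pvRL n blocks S (i + 1) :=
        (mem_pvRL_succ n blocks S i v).2 (Or.inr ⟨u, hui, hadj⟩)
      exact pvRL_mono n blocks S (by omega) v this

theorem pvVp_iff_ever (n : Int) (blocks : List (List Int)) (S : List (Int × Int)) (T : Nat)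
    (hstop : pvStopped n blocks S T) (v : Int × Int) :
    pvVp n blocks S T v ↔ pvEver n blocks S v := by
  constructor
  · rintro ⟨i, _, h⟩; exact ⟨i, h⟩
  · rintro ⟨j, h⟩
    exact hstop v (pvStopped_mem n blocks S T hstop j v h)

theorem pvFirst_lt_stop (n : Int) (blocks : List (List Int)) (S : List (Int × Int)) (T d : Nat)
    (hstop : pvStopped n blocks S T) (v : Int × Int) (hf : pvFirstAt n blocks S d v) :
    d < T := by
  by_contra hge
  have hvT : v ∈ pvRL n blocks S T := pvStopped_mem n blocks S T hstop d v hf.1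
  rcases hstop v hvT with ⟨i, hi, hvi⟩
  exact hf.2 i (by omega) hvi

theorem pvFirst_unique (n : Int) (blocks : List (List Int)) (S : List (Int × Int))
    (d d' : Nat) (v : Int × Int) (h : pvFirstAt n blocks S d v)
    (h' : pvFirstAt n blocks S d' v) : d = d' := by
  by_contra hne
  rcases Nat.lt_or_ge d d' with hlt | hge
  · exact h'.2 d hlt h.1
  · exact h.2 d' (by omega) h'.1

theorem pvFlvI_spec (n : Int) (blocks : List (List Int)) (S : List (Int × Int)) (v : Int × Int)
    (h : pvEver n blocks S v) :
    ∃ dn : Nat, pvFlvI n blocks S v = (dn : Int) ∧ pvFirstAt n blocks S dn v := by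
  unfold pvFlvI
  rw [dif_pos h]
  exact ⟨Nat.find h, rfl, Nat.find_spec h, fun i hi => Nat.find_min h hi⟩

theorem pvFlvI_of_first (n : Int) (blocks : List (List Int)) (S : List (Int × Int))
    (d : Nat) (v : Int × Int) (h : pvFirstAt n blocks S d v) :
    pvFlvI n blocks S v = (d : Int) := by
  have hev : pvEver n blocks S v := ⟨d, h.1⟩
  rcases pvFlvI_spec n blocks S v hev with ⟨dn, heq, hfirst⟩
  rw [heq]
  exact congrArg _ (pvFirst_unique n blocks S dn d v hfirst h)

theorem pvFlvI_of_not_ever (n : Int) (blocks : List (List Int)) (S : List (Int × Int))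
    (v : Int × Int) (h : ¬ pvEver n blocks S v) : pvFlvI n blocks S v = 1000000007 := by
  unfold pvFlvI
  rw [dif_neg h]

theorem pvFirst_min (n : Int) (blocks : List (List Int)) (S : List (Int × Int)) (d : Nat)
    (v : Int × Int) (h : pvFirstAt n blocks S d v) :
    (∃ s ∈ S, pvFirstAt n blocks [s] d v) ∧
      (∀ s ∈ S, ∀ i < d, v ∉ pvRL n blocks [s] i) := by
  have hnot : ∀ s ∈ S, ∀ i < d, v ∉ pvRL n blocks [s] i := by
    intro s hs i hi hmem
    exact h.2 i hi ((pvRL_single n blocks S i v).2 ⟨s, hs, hmem⟩)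
  refine ⟨?_, hnot⟩
  rcases (pvRL_single n blocks S d v).1 h.1 with ⟨s, hs, hmem⟩
  exact ⟨s, hs, hmem, hnot s hs⟩

theorem pvEver_union (n : Int) (blocks : List (List Int)) (S : List (Int × Int))
    (v : Int × Int) : pvEver n blocks S v ↔ ∃ s ∈ S, pvEver n blocks [s] v := by
  constructor
  · rintro ⟨i, h⟩
    rcases (pvRL_single n blocks S i v).1 h with ⟨s, hs, h'⟩
    exact ⟨s, hs, i, h'⟩
  · rintro ⟨s, hs, i, h⟩
    exact ⟨i, (pvRL_single n blocks S i v).2 ⟨s, hs, h⟩⟩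

-- ---------- totSpec ----------

theorem pvNewEmptyB_iff (n : Int) (blocks : List (List Int)) (S : List (Int × Int)) (t : Nat) :
    pvNewEmptyB n blocks S t = true ↔
      ∃ v, pvFirstAt n blocks S t v ∧ pvBGet blocks v.1 v.2 = 0 := by
  unfold pvNewEmptyB pvFirstAt
  rw [List.any_eq_true]
  constructor
  · rintro ⟨v, hv, hcond⟩
    rw [Bool.and_eq_true, decide_eq_true_iff, List.all_eq_true] at hcond
    refine ⟨v, ⟨hv, fun i hi => ?_⟩, hcond.1⟩
    have := hcond.2 i (List.mem_range.2 hi)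
    simpa using this
  · rintro ⟨v, ⟨hv, hnot⟩, he⟩
    refine ⟨v, hv, ?_⟩
    rw [Bool.and_eq_true, decide_eq_true_iff, List.all_eq_true]
    refine ⟨he, fun i hi => ?_⟩
    simpa using hnot i (List.mem_range.1 hi)

theorem pvTotSpec_nonneg (n : Int) (blocks : List (List Int)) (S : List (Int × Int)) :
    ∀ (t : Nat), 0 ≤ pvTotSpec n blocks S t := by
  intro t
  induction t with
  | zero => simp [pvTotSpec]
  | succ t ih =>
    show (0:Int) ≤ (if pvNewEmptyB n blocks S t = true then
      max (pvTotSpec n blocks S t) (t : Int) else pvTotSpec n blocks S t)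
    split
    · exact le_trans ih (le_max_left _ _)
    · exact ih

theorem pvTotSpec_mono_succ (n : Int) (blocks : List (List Int)) (S : List (Int × Int))
    (t : Nat) : pvTotSpec n blocks S t ≤ pvTotSpec n blocks S (t + 1) := by
  show pvTotSpec n blocks S t ≤ (if pvNewEmptyB n blocks S t = true then
    max (pvTotSpec n blocks S t) (t : Int) else pvTotSpec n blocks S t)
  split
  · exact le_max_left _ _
  · exact le_refl _

theorem pvTotSpec_le (n : Int) (blocks : List (List Int)) (S : List (Int × Int)) (R : Int)
    (hR : 0 ≤ R) : ∀ (T : Nat),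
    (∀ t' : Nat, t' < T → pvNewEmptyB n blocks S t' = true → (t' : Int) ≤ R) →
    pvTotSpec n blocks S T ≤ R := by
  intro T
  induction T with
  | zero => intro _; simpa [pvTotSpec] using hR
  | succ T ih =>
    intro h
    show (if pvNewEmptyB n blocks S T = true then
      max (pvTotSpec n blocks S T) (T : Int) else pvTotSpec n blocks S T) ≤ R
    split
    · rename_i hguard
      exact max_le (ih (fun t' ht' hg => h t' (by omega) hg)) (h T (by omega) hguard)
    · exact ih (fun t' ht' hg => h t' (by omega) hg)

theorem pvTotSpec_ge (n : Int) (blocks : List (List Int)) (S : List (Int × Int)) (d : Nat) :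
    ∀ (T : Nat), d < T → pvNewEmptyB n blocks S d = true →
    (d : Int) ≤ pvTotSpec n blocks S T := by
  intro T
  induction T with
  | zero => intro h; omega
  | succ T ih =>
    intro hd hg
    rcases Nat.lt_or_ge d T with hlt | hge
    · exact le_trans (ih hlt hg) (pvTotSpec_mono_succ n blocks S T)
    · have : d = T := by omega
      subst this
      show (d : Int) ≤ (if pvNewEmptyB n blocks S d = true then
        max (pvTotSpec n blocks S d) (d : Int) else pvTotSpec n blocks S d)
      rw [if_pos hg]
      exact le_max_right _ _

-- ---------- fold helpers ----------

theorem pvFoldlMaxLe {α : Type} (f : α → Int) (R : Int) :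
    ∀ (l : List α) (a : Int), a ≤ R → (∀ x ∈ l, f x ≤ R) →
    l.foldl (fun acc x => max acc (f x)) a ≤ R := by
  intro l
  induction l with
  | nil => intro a ha _; simpa using ha
  | cons x l ih =>
    intro a ha h
    simp only [List.foldl_cons]
    exact ih (max a (f x)) (by have := h x List.mem_cons_self; omega)
      (fun y hy => h y (List.mem_cons_of_mem _ hy))

theorem pvFoldlMaxCases {α : Type} (f : α → Int) :
    ∀ (l : List α) (a : Int),
    l.foldl (fun acc x => max acc (f x)) a = a ∨
      ∃ x ∈ l, l.foldl (fun acc x => max acc (f x)) a = f x := by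
  intro l
  induction l with
  | nil => intro a; exact Or.inl rfl
  | cons x l ih =>
    intro a
    simp only [List.foldl_cons]
    rcases ih (max a (f x)) with h | ⟨y, hy, h⟩
    · by_cases hle : f x ≤ a
      · exact Or.inl (by rw [h]; exact max_eq_left hle)
      · exact Or.inr ⟨x, List.mem_cons_self, by rw [h]; exact max_eq_right (le_of_not_ge hle)⟩
    · exact Or.inr ⟨y, List.mem_cons_of_mem _ hy, h⟩

theorem pvFoldlMinLB :
    ∀ (l : List Int) (a m : Int), m ≤ a → (∀ x ∈ l, m ≤ x) →
    m ≤ l.foldl min a := by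
  intro l
  induction l with
  | nil => intro a m hm _; simpa using hm
  | cons x l ih =>
    intro a m hm h
    simp only [List.foldl_cons]
    exact ih (min a x) m (le_min hm (h x List.mem_cons_self))
      (fun y hy => h y (List.mem_cons_of_mem _ hy))

-- ---------- cell getters and setters ----------

theorem pvGetD_set_self {α : Type} (l : List α) (i : Nat) (x d : α) (h : i < l.length) :
    (l.set i x).getD i d = x := by
  simp [List.getD_eq_getElem?_getD, List.getElem?_set_self h]

theorem pvGetD_set_ne {α : Type} (l : List α) (i j : Nat) (x d : α) (h : j ≠ i) :
    (l.set i x).getD j d = l.getD j d := by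
  rw [List.getD_eq_getElem?_getD, List.getElem?_set_ne (by omega), ← List.getD_eq_getElem?_getD]

theorem pvVGet_vset_self (n : Int) (vis : List (List Bool)) (u : Int × Int)
    (hsh : pvSh n vis) (hu : pvInR n u) : pvVGet (pvVSet vis u.1 u.2) u.1 u.2 = true := by
  obtain ⟨h1, h2, h3, h4⟩ := hu
  have hr : u.1.toNat < vis.length := by have := hsh.1; omega
  have hrow := hsh.2 u.1.toNat (by omega)
  have hc : u.2.toNat < (vis.getD u.1.toNat []).length := by omega
  unfold pvVGet pvVSet
  rw [pvGetD_set_self _ _ _ _ hr, pvGetD_set_self _ _ _ _ hc]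

theorem pvVGet_vset_other (n : Int) (vis : List (List Bool)) (u v : Int × Int)
    (hu : pvInR n u) (hv : pvInR n v) (hne : v ≠ u) :
    pvVGet (pvVSet vis u.1 u.2) v.1 v.2 = pvVGet vis v.1 v.2 := by
  unfold pvVGet pvVSet
  by_cases hr : v.1.toNat = u.1.toNat
  · have h1 : v.1 = u.1 := by obtain ⟨a,b,c,d⟩ := hu; obtain ⟨a',b',c',d'⟩ := hv; omega
    have hc : v.2.toNat ≠ u.2.toNat := by
      obtain ⟨a,b,c,d⟩ := hu; obtain ⟨a',b',c',d'⟩ := hv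
      have : v.2 ≠ u.2 := fun h => hne (Prod.ext h1 h)
      omega
    rw [hr]
    by_cases hrl : u.1.toNat < vis.length
    · rw [pvGetD_set_self _ _ _ _ hrl, pvGetD_set_ne _ _ _ _ _ hc]
    · rw [List.set_eq_of_length_le (by omega)]
  · rw [pvGetD_set_ne _ _ _ _ _ hr]

theorem pvDGet_dset_self (n : Int) (g : List (List (Option Int))) (u : Int × Int) (w : Int)
    (hsh : pvShD n g) (hu : pvInR n u) : pvDGet (pvDSet g u.1 u.2 w) u.1 u.2 = some w := by
  obtain ⟨h1, h2, h3, h4⟩ := hu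
  have hr : u.1.toNat < g.length := by have := hsh.1; omega
  have hrow := hsh.2 u.1.toNat (by omega)
  have hc : u.2.toNat < (g.getD u.1.toNat []).length := by omega
  unfold pvDGet pvDSet
  rw [pvGetD_set_self _ _ _ _ hr, pvGetD_set_self _ _ _ _ hc]

theorem pvDGet_dset_other (n : Int) (g : List (List (Option Int))) (u v : Int × Int) (w : Int)
    (hu : pvInR n u) (hv : pvInR n v) (hne : v ≠ u) :
    pvDGet (pvDSet g u.1 u.2 w) v.1 v.2 = pvDGet g v.1 v.2 := by
  unfold pvDGet pvDSet
  by_cases hr : v.1.toNat = u.1.toNat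
  · have h1 : v.1 = u.1 := by obtain ⟨a,b,c,d⟩ := hu; obtain ⟨a',b',c',d'⟩ := hv; omega
    have hc : v.2.toNat ≠ u.2.toNat := by
      obtain ⟨a,b,c,d⟩ := hu; obtain ⟨a',b',c',d'⟩ := hv
      have : v.2 ≠ u.2 := fun h => hne (Prod.ext h1 h)
      omega
    rw [hr]
    by_cases hrl : u.1.toNat < g.length
    · rw [pvGetD_set_self _ _ _ _ hrl, pvGetD_set_ne _ _ _ _ _ hc]
    · rw [List.set_eq_of_length_le (by omega)]
  · rw [pvGetD_set_ne _ _ _ _ _ hr]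

theorem mem_pvNbrs (n : Int) (blocks : List (List Int)) (vis : List (List Bool)) (u : Int × Int)
    (v : Int × Int) : v ∈ pvNbrs n blocks vis u.1 u.2 ↔
      v ∈ pvAdj n blocks u ∧ pvVGet vis v.1 v.2 = false := by
  unfold pvNbrs pvAdj
  constructor
  · intro h
    rcases List.mem_filterMap.1 h with ⟨d, hd, hcond⟩
    split at hcond
    · rename_i hc
      cases hcond
      refine ⟨List.mem_filterMap.2 ⟨d, hd, ?_⟩, hc.2.2.2.2.2⟩
      rw [if_pos ⟨hc.1, hc.2.1, hc.2.2.1, hc.2.2.2.1, hc.2.2.2.2.1⟩]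
    · cases hcond
  · rintro ⟨hadj, hvis⟩
    rcases List.mem_filterMap.1 hadj with ⟨d, hd, hcond⟩
    split at hcond
    · rename_i hc
      cases hcond
      refine List.mem_filterMap.2 ⟨d, hd, ?_⟩
      rw [if_pos ⟨hc.1, hc.2.1, hc.2.2.1, hc.2.2.2.1, hc.2.2.2.2, hvis⟩]
    · cases hcond

theorem mem_pvNbrsD (n : Int) (blocks : List (List Int)) (g : List (List (Option Int)))
    (u : Int × Int) (v : Int × Int) : v ∈ pvNbrsD n blocks g u.1 u.2 ↔
      v ∈ pvAdj n blocks u ∧ pvDGet g v.1 v.2 = none := by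
  unfold pvNbrsD pvAdj
  constructor
  · intro h
    rcases List.mem_filterMap.1 h with ⟨d, hd, hcond⟩
    split at hcond
    · rename_i hc
      cases hcond
      refine ⟨List.mem_filterMap.2 ⟨d, hd, ?_⟩, hc.2.2.2.2.2⟩
      rw [if_pos ⟨hc.1, hc.2.1, hc.2.2.1, hc.2.2.2.1, hc.2.2.2.2.1⟩]
    · cases hcond
  · rintro ⟨hadj, hg⟩
    rcases List.mem_filterMap.1 hadj with ⟨d, hd, hcond⟩
    split at hcond
    · rename_i hc
      cases hcond
      refine List.mem_filterMap.2 ⟨d, hd, ?_⟩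
      rw [if_pos ⟨hc.1, hc.2.1, hc.2.2.1, hc.2.2.2.1, hc.2.2.2.2, hg⟩]
    · cases hcond

-- ---------- initial grids ----------

theorem pvVGet_vis0 (blocks : List (List Int)) (r c : Int) :
    pvVGet (blocks.map (fun row => row.map (fun _ => false))) r c = false := by
  unfold pvVGet
  simp only [List.getD_eq_getElem?_getD, List.getElem?_map]
  cases blocks[r.toNat]? with
  | none => rfl
  | some row =>
    simp only [Option.map_some, Option.getD_some, List.getElem?_map]
    cases row[c.toNat]? <;> rfl

theorem pvDGet_dist0 (blocks : List (List Int)) (r c : Int) :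
    pvDGet (blocks.map (fun row => row.map (fun _ => (none : Option Int)))) r c = none := by
  unfold pvDGet
  simp only [List.getD_eq_getElem?_getD, List.getElem?_map]
  cases blocks[r.toNat]? with
  | none => rfl
  | some row =>
    simp only [Option.map_some, Option.getD_some, List.getElem?_map]
    cases row[c.toNat]? <;> rfl

theorem pvSh_vis0 (n : Int) (blocks : List (List Int)) (hn : 0 ≤ n)
    (hlen : n ≤ (blocks.length : Int))
    (hrow : ∀ row ∈ blocks.take n.toNat, n ≤ (row.length : Int)) :
    pvSh n (blocks.map (fun row => row.map (fun _ => false))) := by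
  constructor
  · simpa using hlen
  · intro i hi
    have hib : i < blocks.length := by omega
    simp only [List.getD_eq_getElem?_getD, List.getElem?_map,
      List.getElem?_eq_getElem hib, Option.map_some, Option.getD_some, List.length_map]
    have hlt : i < (blocks.take n.toNat).length := by simp; omega
    have hmem := List.getElem_mem hlt
    rw [List.getElem_take] at hmem
    exact hrow _ hmem

theorem pvShD_dist0 (n : Int) (blocks : List (List Int)) (hn : 0 ≤ n)
    (hlen : n ≤ (blocks.length : Int))
    (hrow : ∀ row ∈ blocks.take n.toNat, n ≤ (row.length : Int)) :
    pvShD n (blocks.map (fun row => row.map (fun _ => (none : Option Int)))) := by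
  constructor
  · simpa using hlen
  · intro i hi
    have hib : i < blocks.length := by omega
    simp only [List.getD_eq_getElem?_getD, List.getElem?_map,
      List.getElem?_eq_getElem hib, Option.map_some, Option.getD_some, List.length_map]
    have hlt : i < (blocks.take n.toNat).length := by simp; omega
    have hmem := List.getElem_mem hlt
    rw [List.getElem_take] at hmem
    exact hrow _ hmem

-- ---------- coverage scan and empties ----------

theorem pvCover_iff (n : Int) (blocks : List (List Int)) (vis : List (List Bool)) :
    pvCover n blocks vis = true ↔
      ∀ v : Int × Int, pvInR n v → pvBGet blocks v.1 v.2 = 0 → pvVGet vis v.1 v.2 = true := by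
  unfold pvCover
  rw [List.all_eq_true]
  constructor
  · intro h v hv he
    obtain ⟨h1, h2, h3, h4⟩ := hv
    have := h v.1 (PySem.List.mem_pyRange_one.2 ⟨h1, h2⟩)
    rw [List.all_eq_true] at this
    have := this v.2 (PySem.List.mem_pyRange_one.2 ⟨h3, h4⟩)
    rcases Bool.or_eq_true_iff.1 this with hl | hr
    · rw [Bool.not_eq_eq_eq_not, Bool.not_true, decide_eq_false_iff_not] at hl
      exact absurd he hl
    · exact hr
  · intro h r hr
    rw [List.all_eq_true]
    intro c hc
    rcases PySem.List.mem_pyRange_one.1 hr with ⟨h1, h2⟩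
    rcases PySem.List.mem_pyRange_one.1 hc with ⟨h3, h4⟩
    by_cases he : pvBGet blocks r c = 0
    · rw [h (r, c) ⟨h1, h2, h3, h4⟩ he]
      simp
    · simp [he]

theorem mem_pvEmpties (n : Int) (blocks : List (List Int)) (v : Int × Int) :
    v ∈ pvEmpties n blocks ↔ pvInR n v ∧ pvBGet blocks v.1 v.2 = 0 := by
  unfold pvEmpties
  rw [List.mem_flatMap]
  constructor
  · rintro ⟨r, hr, hv⟩
    rcases List.mem_filterMap.1 hv with ⟨c, hc, hcond⟩
    rcases PySem.List.mem_pyRange_one.1 hr with ⟨h1, h2⟩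
    rcases PySem.List.mem_pyRange_one.1 hc with ⟨h3, h4⟩
    split at hcond
    · rename_i he
      cases hcond
      exact ⟨⟨h1, h2, h3, h4⟩, he⟩
    · cases hcond
  · rintro ⟨⟨h1, h2, h3, h4⟩, he⟩
    refine ⟨v.1, PySem.List.mem_pyRange_one.2 ⟨h1, h2⟩, List.mem_filterMap.2
      ⟨v.2, PySem.List.mem_pyRange_one.2 ⟨h3, h4⟩, ?_⟩⟩
    rw [if_pos he]

-- ---------- A's machine: one level preserves the reachability invariant ----------

theorem pvRunA_inv (n : Int) (blocks : List (List Int)) (S : List (Int × Int))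
    (hS : ∀ s ∈ S, pvInR n s) (t : Nat) :
    ∀ (cur next : List (Int × Int)) (vis : List (List Bool)) (tot0 tot : Int)
      (P : List (Int × Int)),
    pvSh n vis →
    (∀ v, pvInR n v → (pvVGet vis v.1 v.2 = true ↔ (pvVp n blocks S t v ∨ v ∈ P))) →
    (∀ v ∈ P, v ∈ pvRL n blocks S t ∧ ¬ pvVp n blocks S t v) →
    (∀ v ∈ cur, v ∈ pvRL n blocks S t) →
    (∀ v, v ∈ pvRL n blocks S t → ¬ pvVp n blocks S t v → v ∉ P → v ∈ cur) →
    (∀ v ∈ next, v ∈ pvRL n blocks S (t + 1)) →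
    (∀ v, v ∈ pvRL n blocks S (t + 1) → v ∉ pvRL n blocks S t →
      (v ∈ next ∨ ∃ u ∈ cur, (u ∉ P ∧ ¬ pvVp n blocks S t u) ∧ v ∈ pvAdj n blocks u)) →
    (tot = if ∃ v ∈ P, pvBGet blocks v.1 v.2 = 0 then max tot0 (t : Int) else tot0) →
    ∃ P' : List (Int × Int),
      (pvRunLevel n blocks cur next vis tot (t : Int)).2.2 =
        (if ∃ v ∈ P', pvBGet blocks v.1 v.2 = 0 then max tot0 (t : Int) else tot0) ∧
      pvSh n (pvRunLevel n blocks cur next vis tot (t : Int)).2.1 ∧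
      (∀ v, pvInR n v →
        (pvVGet (pvRunLevel n blocks cur next vis tot (t : Int)).2.1 v.1 v.2 = true ↔
          (pvVp n blocks S t v ∨ v ∈ P'))) ∧
      (∀ v ∈ P', v ∈ pvRL n blocks S t ∧ ¬ pvVp n blocks S t v) ∧
      (∀ v, v ∈ pvRL n blocks S t → ¬ pvVp n blocks S t v → v ∈ P') ∧
      (∀ v ∈ (pvRunLevel n blocks cur next vis tot (t : Int)).1, v ∈ pvRL n blocks S (t + 1)) ∧
      (∀ v, v ∈ pvRL n blocks S (t + 1) → v ∉ pvRL n blocks S t →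
        v ∈ (pvRunLevel n blocks cur next vis tot (t : Int)).1) := by
  intro cur
  induction cur with
  | nil =>
    intro next vis tot0 tot P hsh h1 h2 h3 h4 h5 h6 htot
    refine ⟨P, htot, hsh, h1, h2, ?_, h5, ?_⟩
    · intro v hv hnvp
      by_contra hP
      exact absurd (h4 v hv hnvp hP) (List.not_mem_nil)
    · intro v hv hnot
      rcases h6 v hv hnot with h | ⟨u, hu, _⟩
      · exact h
      · exact absurd hu (List.not_mem_nil)
  | cons s cur ih =>
    intro next vis tot0 tot P hsh h1 h2 h3 h4 h5 h6 htot
    have hsR : s ∈ pvRL n blocks S t := h3 s List.mem_cons_self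
    have hsIn : pvInR n s := pvRL_inR n blocks S hS t s hsR
    simp only [pvRunLevel]
    split
    · -- s already visited: skip
      rename_i hvis
      have hsVpP : pvVp n blocks S t s ∨ s ∈ P := (h1 s hsIn).1 hvis
      apply ih next vis tot0 tot P hsh h1 h2
        (fun v hv => h3 v (List.mem_cons_of_mem _ hv))
        ?_ h5 ?_ htot
      · intro v hv hnvp hnP
        rcases List.mem_cons.1 (h4 v hv hnvp hnP) with rfl | h
        · exact absurd hsVpP (by simp [hnvp, hnP])
        · exact h
      · intro v hv hnot
        rcases h6 v hv hnot with h | ⟨u, hu, hcond, hadj⟩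
        · exact Or.inl h
        · rcases List.mem_cons.1 hu with rfl | hu'
          · exact absurd hsVpP (by simp [hcond.1, hcond.2])
          · exact Or.inr ⟨u, hu', hcond, hadj⟩
    · -- s freshly processed
      rename_i hvis
      have hsNot : ¬ (pvVp n blocks S t s ∨ s ∈ P) := fun h => hvis ((h1 s hsIn).2 h)
      have hsVp : ¬ pvVp n blocks S t s := fun h => hsNot (Or.inl h)
      have hsP : s ∉ P := fun h => hsNot (Or.inr h)
      have hsh' := pvSh_vset n vis s.1 s.2 hsh
      apply ih (next ++ pvNbrs n blocks (pvVSet vis s.1 s.2) s.1 s.2) (pvVSet vis s.1 s.2)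
        tot0 (if pvBGet blocks s.1 s.2 = 0 then max tot (t : Int) else tot) (P ++ [s])
        hsh' ?_ ?_ (fun v hv => h3 v (List.mem_cons_of_mem _ hv)) ?_ ?_ ?_ ?_
      · -- visited characterisation
        intro v hv
        by_cases hvs : v = s
        · subst hvs
          rw [pvVGet_vset_self n vis v hsh hv]
          simp
        · rw [pvVGet_vset_other n vis s v hsIn hv hvs, h1 v hv]
          simp [hvs]
      · -- P ++ [s] properties
        intro v hv
        rcases List.mem_append.1 hv with h | h
        · exact h2 v h
        · rcases List.mem_singleton.1 h with rfl
          exact ⟨hsR, hsVp⟩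
      · -- pending cells still in cur
        intro v hv hnvp hnP
        have hvP : v ∉ P := fun h => hnP (List.mem_append.2 (Or.inl h))
        have hvs : v ≠ s := fun h => hnP (List.mem_append.2 (Or.inr (by simp [h])))
        rcases List.mem_cons.1 (h4 v hv hnvp hvP) with rfl | h
        · exact absurd rfl hvs
        · exact h
      · -- next upper bound
        intro v hv
        rcases List.mem_append.1 hv with h | h
        · exact h5 v h
        · rcases (mem_pvNbrs n blocks (pvVSet vis s.1 s.2) s v).1 h with ⟨hadj, _⟩
          exact (mem_pvRL_succ n blocks S t v).2 (Or.inr ⟨s, hsR, hadj⟩)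
      · -- next lower bound
        intro v hv hnot
        rcases h6 v hv hnot with h | ⟨u, hu, hcond, hadj⟩
        · exact Or.inl (List.mem_append.2 (Or.inl h))
        · have hvIn : pvInR n v := (pvAdj_inR n blocks u v hadj).1
          by_cases hus : u = s
          · subst hus
            refine Or.inl (List.mem_append.2 (Or.inr ?_))
            rw [mem_pvNbrs n blocks (pvVSet vis u.1 u.2) u v]
            refine ⟨hadj, ?_⟩
            cases hvv : pvVGet (pvVSet vis u.1 u.2) v.1 v.2 with
            | false => rfl
            | true =>
              exfalso
              by_cases hvu : v = u
              · subst hvu; exact hnot hsR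
              · rw [pvVGet_vset_other n vis u v hsIn hvIn hvu] at hvv
                rcases (h1 v hvIn).1 hvv with h | h
                · exact hnot (pvVp_mem n blocks S t v h)
                · exact hnot (h2 v h).1
          · rcases List.mem_cons.1 hu with rfl | hu'
            · exact absurd rfl hus
            · refine Or.inr ⟨u, hu', ⟨?_, hcond.2⟩, hadj⟩
              intro hmem
              rcases List.mem_append.1 hmem with h | h
              · exact hcond.1 h
              · exact hus (List.mem_singleton.1 h)
      · -- total bookkeeping
        by_cases hse : pvBGet blocks s.1 s.2 = 0
        · rw [if_pos hse, htot,
            if_pos (⟨s, List.mem_append.2 (Or.inr (List.mem_singleton.2 rfl)), hse⟩ :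
              ∃ v ∈ P ++ [s], pvBGet blocks v.1 v.2 = 0)]
          split
          · omega
          · omega
        · rw [if_neg hse, htot]
          have : (∃ v ∈ P ++ [s], pvBGet blocks v.1 v.2 = 0) ↔
              (∃ v ∈ P, pvBGet blocks v.1 v.2 = 0) := by
            constructor
            · rintro ⟨v, hv, he⟩
              rcases List.mem_append.1 hv with h | h
              · exact ⟨v, h, he⟩
              · rcases List.mem_singleton.1 h with rfl
                exact absurd he hse
            · rintro ⟨v, hv, he⟩
              exact ⟨v, List.mem_append.2 (Or.inl hv), he⟩
          rcases Classical.em (∃ v ∈ P, pvBGet blocks v.1 v.2 = 0) with h | h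
          · rw [if_pos h, if_pos (this.2 h)]
          · rw [if_neg h, if_neg (fun hh => h (this.1 hh))]

-- ---------- A's machine: full run ----------

theorem pvLevA_inv (n : Int) (blocks : List (List Int)) (S : List (Int × Int))
    (hS : ∀ s ∈ S, pvInR n s) :
    ∀ (k : Nat) (fr : List (Int × Int)) (vis : List (List Bool)) (tot : Int) (t : Nat),
    pvCountFalse vis < k → pvSh n vis →
    (∀ v, pvInR n v → (pvVGet vis v.1 v.2 = true ↔ pvVp n blocks S t v)) →
    (∀ v ∈ fr, v ∈ pvRL n blocks S t) →
    (∀ v, v ∈ pvRL n blocks S t → ¬ pvVp n blocks S t v → v ∈ fr) →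
    tot = pvTotSpec n blocks S t →
    ∃ T : Nat, pvStopped n blocks S T ∧
      (∀ v, pvInR n v →
        (pvVGet (pvLevels n blocks k fr vis tot (t : Int)).1 v.1 v.2 = true ↔
          pvVp n blocks S T v)) ∧
      (pvLevels n blocks k fr vis tot (t : Int)).2 = pvTotSpec n blocks S T := by
  intro k
  induction k with
  | zero => intro fr vis tot t hk; omega
  | succ k ih =>
    intro fr vis tot t hk hsh hvis hfr hlow htot
    cases fr with
    | nil =>
      refine ⟨t, ?_, hvis, htot⟩
      intro v hv
      by_contra hnvp
      exact absurd (hlow v hv hnvp) (List.not_mem_nil)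
    | cons s fr' =>
      simp only [pvLevels]
      have hfrR : ∀ p ∈ s :: fr', pvInR n p :=
        fun p hp => pvRL_inR n blocks S hS t p (hfr p hp)
      have hspec := pvRunLevel_spec n blocks (s :: fr') [] vis tot (t : Int) hsh hfrR
        (by simp)
      have h6pre : ∀ v, v ∈ pvRL n blocks S (t + 1) → v ∉ pvRL n blocks S t →
          (v ∈ ([] : List (Int × Int)) ∨ ∃ u ∈ s :: fr',
            (u ∉ ([] : List (Int × Int)) ∧ ¬ pvVp n blocks S t u) ∧ v ∈ pvAdj n blocks u) := by
        intro v hv hnot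
        rcases (mem_pvRL_succ n blocks S t v).1 hv with h | ⟨u, hu, hadj⟩
        · exact absurd h hnot
        · have hnvpu : ¬ pvVp n blocks S t u := by
            rintro ⟨i, hi, hui⟩
            exact hnot (pvRL_mono n blocks S (by omega) v
              ((mem_pvRL_succ n blocks S i v).2 (Or.inr ⟨u, hui, hadj⟩)))
          exact Or.inr ⟨u, hlow u hu hnvpu, ⟨List.not_mem_nil, hnvpu⟩, hadj⟩
      have hinv := pvRunA_inv n blocks S hS t (s :: fr') [] vis tot tot [] hsh
        (fun v hv => by rw [hvis v hv]; simp)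
        (by simp)
        hfr
        (fun v hv hnvp _ => hlow v hv hnvp)
        (by simp)
        h6pre
        (by simp)
      obtain ⟨P', ctot, csh, cvis, cP, cpend, cnext, clower⟩ := hinv
      rcases hrl : pvRunLevel n blocks (s :: fr') [] vis tot (t : Int) with ⟨next', vis', tot'⟩
      rw [hrl] at ctot csh cvis cnext clower hspec
      simp only at ctot csh cvis cnext clower hspec ⊢
      have hvis' : ∀ v, pvInR n v →
          (pvVGet vis' v.1 v.2 = true ↔ pvVp n blocks S (t + 1) v) := by
        intro v hv
        rw [cvis v hv, pvVp_succ_iff]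
        constructor
        · rintro (h | h)
          · exact pvVp_mem n blocks S t v h
          · exact (cP v h).1
        · intro h
          by_cases hvp : pvVp n blocks S t v
          · exact Or.inl hvp
          · exact Or.inr (cpend v h hvp)
      have hguard : (∃ v ∈ P', pvBGet blocks v.1 v.2 = 0) ↔ pvNewEmptyB n blocks S t = true := by
        rw [pvNewEmptyB_iff]
        constructor
        · rintro ⟨v, hv, he⟩
          obtain ⟨hvR, hvVp⟩ := cP v hv
          refine ⟨v, ⟨hvR, fun i hi hmem => hvVp ⟨i, hi, hmem⟩⟩, he⟩
        · rintro ⟨v, ⟨hvR, hnot⟩, he⟩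
          have hnvp : ¬ pvVp n blocks S t v := by rintro ⟨i, hi, hmem⟩; exact hnot i hi hmem
          exact ⟨v, cpend v hvR hnvp, he⟩
      have htot' : tot' = pvTotSpec n blocks S (t + 1) := by
        rw [ctot, htot]
        show _ = (if pvNewEmptyB n blocks S t = true then
          max (pvTotSpec n blocks S t) (t : Int) else pvTotSpec n blocks S t)
        rcases Classical.em (∃ v ∈ P', pvBGet blocks v.1 v.2 = 0) with h | h
        · rw [if_pos h, if_pos (hguard.1 h)]
        · rw [if_neg h, if_neg (fun hh => h (hguard.2 hh))]
      have hlow' : ∀ v, v ∈ pvRL n blocks S (t + 1) → ¬ pvVp n blocks S (t + 1) v →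
          v ∈ next' := by
        intro v hv hnvp
        refine clower v hv (fun hmem => hnvp ((pvVp_succ_iff n blocks S t v).2 hmem))
      cases next' with
      | nil =>
        rw [pvLevels_nil]
        refine ⟨t + 1, ?_, hvis', htot'⟩
        intro v hv
        by_contra hnvp
        exact absurd (hlow' v hv hnvp) (List.not_mem_nil)
      | cons a next'' =>
        have hcf : pvCountFalse vis' < k := by
          have h1 := hspec.2.2.1
          have h2 := hspec.2.2.2
          simp [List.length_cons] at h2
          omega
        have := ih (a :: next'') vis' tot' (t + 1) hcf csh hvis' cnext hlow' htot'
        rcases this with ⟨T, hstop, hvisT, htotT⟩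
        refine ⟨T, hstop, ?_, ?_⟩
        · intro v hv
          have := hvisT v hv
          rwa [show ((t : Int) + 1) = (((t + 1 : Nat)) : Int) by push_cast; ring]
        · rw [show ((t : Int) + 1) = (((t + 1 : Nat)) : Int) by push_cast; ring]
          exact htotT

-- ---------- B's machine: one level ----------

theorem pvRunB_inv (n : Int) (blocks : List (List Int)) (S : List (Int × Int))
    (hS : ∀ s ∈ S, pvInR n s) (t : Nat) :
    ∀ (cur next : List (Int × Int)) (dist : List (List (Option Int)))
      (P : List (Int × Int)),
    pvShD n dist →
    (∀ v, pvInR n v → ((pvDGet dist v.1 v.2).isSome = true ↔ (pvVp n blocks S t v ∨ v ∈ P))) →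
    (∀ v, pvInR n v → ∀ d : Int, pvDGet dist v.1 v.2 = some d →
      ∃ dn : Nat, d = (dn : Int) ∧ pvFirstAt n blocks S dn v) →
    (∀ v ∈ P, v ∈ pvRL n blocks S t ∧ ¬ pvVp n blocks S t v) →
    (∀ v ∈ cur, v ∈ pvRL n blocks S t) →
    (∀ v, v ∈ pvRL n blocks S t → ¬ pvVp n blocks S t v → v ∉ P → v ∈ cur) →
    (∀ v ∈ next, v ∈ pvRL n blocks S (t + 1)) →
    (∀ v, v ∈ pvRL n blocks S (t + 1) → v ∉ pvRL n blocks S t →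
      (v ∈ next ∨ ∃ u ∈ cur, (u ∉ P ∧ ¬ pvVp n blocks S t u) ∧ v ∈ pvAdj n blocks u)) →
    ∃ P' : List (Int × Int),
      pvShD n (pvRunLevelD n blocks cur next dist (t : Int)).2 ∧
      (∀ v, pvInR n v →
        ((pvDGet (pvRunLevelD n blocks cur next dist (t : Int)).2 v.1 v.2).isSome = true ↔
          (pvVp n blocks S t v ∨ v ∈ P'))) ∧
      (∀ v, pvInR n v → ∀ d : Int,
        pvDGet (pvRunLevelD n blocks cur next dist (t : Int)).2 v.1 v.2 = some d →
        ∃ dn : Nat, d = (dn : Int) ∧ pvFirstAt n blocks S dn v) ∧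
      (∀ v ∈ P', v ∈ pvRL n blocks S t ∧ ¬ pvVp n blocks S t v) ∧
      (∀ v, v ∈ pvRL n blocks S t → ¬ pvVp n blocks S t v → v ∈ P') ∧
      (∀ v ∈ (pvRunLevelD n blocks cur next dist (t : Int)).1, v ∈ pvRL n blocks S (t + 1)) ∧
      (∀ v, v ∈ pvRL n blocks S (t + 1) → v ∉ pvRL n blocks S t →
        v ∈ (pvRunLevelD n blocks cur next dist (t : Int)).1) := by
  intro cur
  induction cur with
  | nil =>
    intro next dist P hsh h1 h1s h2 h3 h4 h5 h6
    refine ⟨P, hsh, h1, h1s, h2, ?_, h5, ?_⟩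
    · intro v hv hnvp
      by_contra hP
      exact absurd (h4 v hv hnvp hP) (List.not_mem_nil)
    · intro v hv hnot
      rcases h6 v hv hnot with h | ⟨u, hu, _⟩
      · exact h
      · exact absurd hu (List.not_mem_nil)
  | cons s cur ih =>
    intro next dist P hsh h1 h1s h2 h3 h4 h5 h6
    have hsR : s ∈ pvRL n blocks S t := h3 s List.mem_cons_self
    have hsIn : pvInR n s := pvRL_inR n blocks S hS t s hsR
    simp only [pvRunLevelD]
    split
    · -- s already has a distance: skip
      rename_i hvis
      have hsVpP : pvVp n blocks S t s ∨ s ∈ P := (h1 s hsIn).1 hvis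
      apply ih next dist P hsh h1 h1s h2
        (fun v hv => h3 v (List.mem_cons_of_mem _ hv))
        ?_ h5 ?_
      · intro v hv hnvp hnP
        rcases List.mem_cons.1 (h4 v hv hnvp hnP) with rfl | h
        · exact absurd hsVpP (by simp [hnvp, hnP])
        · exact h
      · intro v hv hnot
        rcases h6 v hv hnot with h | ⟨u, hu, hcond, hadj⟩
        · exact Or.inl h
        · rcases List.mem_cons.1 hu with rfl | hu'
          · exact absurd hsVpP (by simp [hcond.1, hcond.2])
          · exact Or.inr ⟨u, hu', hcond, hadj⟩
    · -- s freshly processed: store level t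
      rename_i hvis
      have hsNone : pvDGet dist s.1 s.2 = none := by
        cases hh : pvDGet dist s.1 s.2 with
        | none => rfl
        | some d => rw [hh] at hvis; simp at hvis
      have hsNot : ¬ (pvVp n blocks S t s ∨ s ∈ P) := by
        intro h
        have := (h1 s hsIn).2 h
        rw [hsNone] at this
        simp at this
      have hsVp : ¬ pvVp n blocks S t s := fun h => hsNot (Or.inl h)
      have hsh' := pvShD_dset n dist s.1 s.2 (t : Int) hsh
      apply ih (next ++ pvNbrsD n blocks (pvDSet dist s.1 s.2 (t : Int)) s.1 s.2)
        (pvDSet dist s.1 s.2 (t : Int)) (P ++ [s]) hsh' ?_ ?_ ?_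
        (fun v hv => h3 v (List.mem_cons_of_mem _ hv)) ?_ ?_ ?_
      · -- isSome characterisation
        intro v hv
        by_cases hvs : v = s
        · subst hvs
          rw [pvDGet_dset_self n dist v (t : Int) hsh hv]
          simp
        · rw [pvDGet_dset_other n dist s v (t : Int) hsIn hv hvs, h1 v hv]
          simp [hvs]
      · -- stored values are first levels
        intro v hv d hd
        by_cases hvs : v = s
        · subst hvs
          rw [pvDGet_dset_self n dist v (t : Int) hsh hv] at hd
          cases hd
          exact ⟨t, rfl, hsR, fun i hi hmem => hsVp ⟨i, hi, hmem⟩⟩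
        · rw [pvDGet_dset_other n dist s v (t : Int) hsIn hv hvs] at hd
          exact h1s v hv d hd
      · -- P ++ [s] properties
        intro v hv
        rcases List.mem_append.1 hv with h | h
        · exact h2 v h
        · rcases List.mem_singleton.1 h with rfl
          exact ⟨hsR, hsVp⟩
      · -- pending cells still in cur
        intro v hv hnvp hnP
        have hvP : v ∉ P := fun h => hnP (List.mem_append.2 (Or.inl h))
        have hvs : v ≠ s := fun h => hnP (List.mem_append.2 (Or.inr (by simp [h])))
        rcases List.mem_cons.1 (h4 v hv hnvp hvP) with rfl | h
        · exact absurd rfl hvs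
        · exact h
      · -- next upper bound
        intro v hv
        rcases List.mem_append.1 hv with h | h
        · exact h5 v h
        · rcases (mem_pvNbrsD n blocks (pvDSet dist s.1 s.2 (t : Int)) s v).1 h with ⟨hadj, _⟩
          exact (mem_pvRL_succ n blocks S t v).2 (Or.inr ⟨s, hsR, hadj⟩)
      · -- next lower bound
        intro v hv hnot
        rcases h6 v hv hnot with h | ⟨u, hu, hcond, hadj⟩
        · exact Or.inl (List.mem_append.2 (Or.inl h))
        · have hvIn : pvInR n v := (pvAdj_inR n blocks u v hadj).1
          by_cases hus : u = s
          · subst hus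
            refine Or.inl (List.mem_append.2 (Or.inr ?_))
            rw [mem_pvNbrsD n blocks (pvDSet dist u.1 u.2 (t : Int)) u v]
            refine ⟨hadj, ?_⟩
            cases hvv : pvDGet (pvDSet dist u.1 u.2 (t : Int)) v.1 v.2 with
            | none => rfl
            | some d =>
              exfalso
              by_cases hvu : v = u
              · subst hvu; exact hnot hsR
              · rw [pvDGet_dset_other n dist u v (t : Int) hsIn hvIn hvu] at hvv
                have : (pvDGet dist v.1 v.2).isSome = true := by rw [hvv]; rfl
                rcases (h1 v hvIn).1 this with h | h
                · exact hnot (pvVp_mem n blocks S t v h)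
                · exact hnot (h2 v h).1
          · rcases List.mem_cons.1 hu with rfl | hu'
            · exact absurd rfl hus
            · refine Or.inr ⟨u, hu', ⟨?_, hcond.2⟩, hadj⟩
              intro hmem
              rcases List.mem_append.1 hmem with h | h
              · exact hcond.1 h
              · exact hus (List.mem_singleton.1 h)

-- ---------- B's machine: full run ----------

theorem pvLevB_inv (n : Int) (blocks : List (List Int)) (S : List (Int × Int))
    (hS : ∀ s ∈ S, pvInR n s) :
    ∀ (k : Nat) (fr : List (Int × Int)) (dist : List (List (Option Int))) (t : Nat),
    pvCountNone dist < k → pvShD n dist →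
    (∀ v, pvInR n v → ((pvDGet dist v.1 v.2).isSome = true ↔ pvVp n blocks S t v)) →
    (∀ v, pvInR n v → ∀ d : Int, pvDGet dist v.1 v.2 = some d →
      ∃ dn : Nat, d = (dn : Int) ∧ pvFirstAt n blocks S dn v) →
    (∀ v ∈ fr, v ∈ pvRL n blocks S t) →
    (∀ v, v ∈ pvRL n blocks S t → ¬ pvVp n blocks S t v → v ∈ fr) →
    ∃ T : Nat, pvStopped n blocks S T ∧
      (∀ v, pvInR n v →
        ((pvDGet (pvLevelsD n blocks k fr dist (t : Int)) v.1 v.2).isSome = true ↔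
          pvVp n blocks S T v)) ∧
      (∀ v, pvInR n v → ∀ d : Int,
        pvDGet (pvLevelsD n blocks k fr dist (t : Int)) v.1 v.2 = some d →
        ∃ dn : Nat, d = (dn : Int) ∧ pvFirstAt n blocks S dn v) := by
  intro k
  induction k with
  | zero => intro fr dist t hk; omega
  | succ k ih =>
    intro fr dist t hk hsh hvis hvals hfr hlow
    cases fr with
    | nil =>
      refine ⟨t, ?_, hvis, hvals⟩
      intro v hv
      by_contra hnvp
      exact absurd (hlow v hv hnvp) (List.not_mem_nil)
    | cons s fr' =>
      simp only [pvLevelsD]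
      have hfrR : ∀ p ∈ s :: fr', pvInR n p :=
        fun p hp => pvRL_inR n blocks S hS t p (hfr p hp)
      have hspec := pvRunLevelD_spec n blocks (s :: fr') [] dist (t : Int) hsh hfrR (by simp)
      have h6pre : ∀ v, v ∈ pvRL n blocks S (t + 1) → v ∉ pvRL n blocks S t →
          (v ∈ ([] : List (Int × Int)) ∨ ∃ u ∈ s :: fr',
            (u ∉ ([] : List (Int × Int)) ∧ ¬ pvVp n blocks S t u) ∧ v ∈ pvAdj n blocks u) := by
        intro v hv hnot
        rcases (mem_pvRL_succ n blocks S t v).1 hv with h | ⟨u, hu, hadj⟩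
        · exact absurd h hnot
        · have hnvpu : ¬ pvVp n blocks S t u := by
            rintro ⟨i, hi, hui⟩
            exact hnot (pvRL_mono n blocks S (by omega) v
              ((mem_pvRL_succ n blocks S i v).2 (Or.inr ⟨u, hui, hadj⟩)))
          exact Or.inr ⟨u, hlow u hu hnvpu, ⟨List.not_mem_nil, hnvpu⟩, hadj⟩
      have hinv := pvRunB_inv n blocks S hS t (s :: fr') [] dist [] hsh
        (fun v hv => by rw [hvis v hv]; simp)
        hvals
        (by simp)
        hfr
        (fun v hv hnvp _ => hlow v hv hnvp)
        (by simp)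
        h6pre
      obtain ⟨P', csh, cvis, cvals, cP, cpend, cnext, clower⟩ := hinv
      rcases hrl : pvRunLevelD n blocks (s :: fr') [] dist (t : Int) with ⟨next', dist'⟩
      rw [hrl] at csh cvis cvals cnext clower hspec
      simp only at csh cvis cvals cnext clower hspec ⊢
      have hvis' : ∀ v, pvInR n v →
          ((pvDGet dist' v.1 v.2).isSome = true ↔ pvVp n blocks S (t + 1) v) := by
        intro v hv
        rw [cvis v hv, pvVp_succ_iff]
        constructor
        · rintro (h | h)
          · exact pvVp_mem n blocks S t v h
          · exact (cP v h).1
        · intro h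
          by_cases hvp : pvVp n blocks S t v
          · exact Or.inl hvp
          · exact Or.inr (cpend v h hvp)
      have hlow' : ∀ v, v ∈ pvRL n blocks S (t + 1) → ¬ pvVp n blocks S (t + 1) v →
          v ∈ next' := by
        intro v hv hnvp
        exact clower v hv (fun hmem => hnvp ((pvVp_succ_iff n blocks S t v).2 hmem))
      cases next' with
      | nil =>
        rw [pvLevelsD_nil]
        refine ⟨t + 1, ?_, hvis', cvals⟩
        intro v hv
        by_contra hnvp
        exact absurd (hlow' v hv hnvp) (List.not_mem_nil)
      | cons a next'' =>
        have hcf : pvCountNone dist' < k := by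
          have h1 := hspec.2.2.1
          have h2 := hspec.2.2.2
          simp [List.length_cons] at h2
          omega
        have := ih (a :: next'') dist' (t + 1) hcf csh hvis' cvals cnext hlow'
        rcases this with ⟨T, hstop, hvisT, hvalsT⟩
        refine ⟨T, hstop, ?_, ?_⟩
        · intro v hv
          have := hvisT v hv
          rwa [show ((t : Int) + 1) = (((t + 1 : Nat)) : Int) by push_cast; ring]
        · intro v hv d
          have := hvalsT v hv d
          rwa [show ((t : Int) + 1) = (((t + 1 : Nat)) : Int) by push_cast; ring]

-- ---------- B's bfs_distances characterised ----------

theorem pvBfs_char (n : Int) (blocks : List (List Int)) (hn : 0 ≤ n)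
    (hlen : n ≤ (blocks.length : Int))
    (hrow : ∀ row ∈ blocks.take n.toNat, n ≤ (row.length : Int))
    (s : Int × Int) (hs : pvInR n s) :
    ∃ T : Nat, pvStopped n blocks [s] T ∧ ∀ v, pvInR n v →
      ((pvDGet (pvBfsDistances n blocks s) v.1 v.2 = none ↔ ¬ pvVp n blocks [s] T v) ∧
       (∀ d : Int, pvDGet (pvBfsDistances n blocks s) v.1 v.2 = some d →
         ∃ dn : Nat, d = (dn : Int) ∧ pvFirstAt n blocks [s] dn v)) := by
  have hS : ∀ p ∈ [s], pvInR n p := by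
    intro p hp
    rcases List.mem_singleton.1 hp with rfl
    exact hs
  have hsh0 := pvShD_dist0 n blocks hn hlen hrow
  have hrun := pvLevB_inv n blocks [s] hS
    (pvCountNone (blocks.map (fun row => row.map (fun _ => (none : Option Int)))) + 1)
    [s] (blocks.map (fun row => row.map (fun _ => (none : Option Int)))) 0
    (by omega) hsh0
    (fun v hv => by
      rw [pvDGet_dist0]
      simp [pvVp]) 
    (fun v hv d hd => by rw [pvDGet_dist0] at hd; cases hd)
    (fun v hv => hv)
    (fun v hv _ => hv)
  rcases hrun with ⟨T, hstop, hvisT, hvalsT⟩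
  simp only [Nat.cast_zero] at hvisT hvalsT
  refine ⟨T, hstop, fun v hv => ⟨?_, ?_⟩⟩
  · constructor
    · intro hnone hvp
      have hsome := (hvisT v hv).2 hvp
      simp only [pvBfsDistances] at hnone
      rw [hnone] at hsome
      simp at hsome
    · intro hnvp
      cases hh : pvDGet (pvBfsDistances n blocks s) v.1 v.2 with
      | none => rfl
      | some d =>
        exfalso
        apply hnvp
        apply (hvisT v hv).1
        simp only [pvBfsDistances] at hh
        rw [hh]
        rfl
  · intro d hd
    simp only [pvBfsDistances] at hd
    exact hvalsT v hv d hd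

-- ---------- A's find_spread_time characterised ----------

theorem pvFstA_char (n : Int) (blocks : List (List Int)) (hn : 0 ≤ n)
    (hlen : n ≤ (blocks.length : Int))
    (hrow : ∀ row ∈ blocks.take n.toNat, n ≤ (row.length : Int))
    (C : List (Int × Int)) (hC : ∀ p ∈ C, pvInR n p) :
    ∃ T : Nat, pvStopped n blocks C T ∧
      ((∀ v ∈ pvEmpties n blocks, pvVp n blocks C T v) →
        pvFstA n blocks C = some (pvTotSpec n blocks C T)) ∧
      ((¬ ∀ v ∈ pvEmpties n blocks, pvVp n blocks C T v) →
        pvFstA n blocks C = none) := by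
  have hsh0 := pvSh_vis0 n blocks hn hlen hrow
  have hbfs := pvL2 n blocks
    (pvCountFalse (blocks.map (fun row => row.map (fun _ => false))) + 1) C
    (blocks.map (fun row => row.map (fun _ => false))) 0 0
    ((C.map (fun s => (s, (0 : Int)))).length + 5 *
      pvCountFalse (blocks.map (fun row => row.map (fun _ => false))) + 1)
    hsh0 hC (by simp) (by omega)
  have hrun := pvLevA_inv n blocks C hC
    (pvCountFalse (blocks.map (fun row => row.map (fun _ => false))) + 1) C
    (blocks.map (fun row => row.map (fun _ => false))) 0 0
    (by omega) hsh0
    (fun v hv => by rw [pvVGet_vis0]; simp [pvVp])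
    (fun v hv => hv)
    (fun v hv _ => hv)
    rfl
  rcases hrun with ⟨T, hstop, hvisT, htotT⟩
  simp only [Nat.cast_zero] at hvisT htotT
  refine ⟨T, hstop, ?_⟩
  simp only [pvFstA]
  rw [hbfs]
  rcases hfin : pvLevels n blocks
      (pvCountFalse (blocks.map (fun row => row.map (fun _ => false))) + 1) C
      (blocks.map (fun row => row.map (fun _ => false))) 0 0 with ⟨visF, totF⟩
  rw [hfin] at hvisT htotT ⊢
  simp only at hvisT htotT ⊢
  have hcovIff : pvCover n blocks visF = true ↔
      ∀ v ∈ pvEmpties n blocks, pvVp n blocks C T v := by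
    rw [pvCover_iff]
    constructor
    · intro h v hv
      rcases (mem_pvEmpties n blocks v).1 hv with ⟨hin, he⟩
      exact (hvisT v hin).1 (h v hin he)
    · intro h v hin he
      exact (hvisT v hin).2 (h v ((mem_pvEmpties n blocks v).2 ⟨hin, he⟩))
  constructor
  · intro hcov
    rw [if_pos (hcovIff.2 hcov), htotT]
  · intro hcov
    rw [if_neg (fun hh => hcov (hcovIff.1 hh))]

-- ---------- the per-cell combined value ----------

theorem pvCellFold_eq_min (gs : List (List (List (Option Int)))) (v : Int × Int) :
    ∀ (a : Int),
    gs.foldl (fun cell g =>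
      match pvDGet g v.1 v.2 with
      | some d => if d < cell then d else cell
      | none => cell) a
      = (gs.filterMap (fun g => pvDGet g v.1 v.2)).foldl min a := by
  induction gs with
  | nil => intro a; rfl
  | cons g gs ih =>
    intro a
    simp only [List.foldl_cons, List.filterMap_cons]
    cases hd : pvDGet g v.1 v.2 with
    | none => exact ih a
    | some d =>
      simp only [List.foldl_cons]
      have : (if d < a then d else a) = min a d := by
        split
        · exact (min_eq_right (by omega)).symm
        · exact (min_eq_left (by omega)).symm
      rw [this]
      exact ih (min a d)

theorem pvCellVal (n : Int) (blocks : List (List Int)) (hn : 0 ≤ n)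
    (hlen : n ≤ (blocks.length : Int))
    (hrow : ∀ row ∈ blocks.take n.toNat, n ≤ (row.length : Int))
    (C : List (Int × Int)) (hC : ∀ p ∈ C, pvInR n p) (v : Int × Int) (hv : pvInR n v) :
    (C.map (pvBfsDistances n blocks)).foldl (fun cell g =>
      match pvDGet g v.1 v.2 with
      | some d => if d < cell then d else cell
      | none => cell) 1000000007
      = min 1000000007 (pvFlvI n blocks C v) := by
  rw [pvCellFold_eq_min, List.filterMap_map]
  simp only [Function.comp_def]
  have hval : ∀ s ∈ C, ∀ d : Int, pvDGet (pvBfsDistances n blocks s) v.1 v.2 = some d →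
      ∃ dn : Nat, d = (dn : Int) ∧ pvFirstAt n blocks [s] dn v := by
    intro s hs d hd
    rcases pvBfs_char n blocks hn hlen hrow s (hC s hs) with ⟨Ts, _, hchar⟩
    exact (hchar v hv).2 d hd
  have hnone : ∀ s ∈ C, ¬ pvEver n blocks [s] v →
      pvDGet (pvBfsDistances n blocks s) v.1 v.2 = none := by
    intro s hs hnev
    rcases pvBfs_char n blocks hn hlen hrow s (hC s hs) with ⟨Ts, hstopS, hchar⟩
    refine (hchar v hv).1.2 ?_
    rw [pvVp_iff_ever n blocks [s] Ts hstopS]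
    exact hnev
  have hsome : ∀ s ∈ C, pvEver n blocks [s] v →
      ∃ d : Int, pvDGet (pvBfsDistances n blocks s) v.1 v.2 = some d := by
    intro s hs hev
    rcases pvBfs_char n blocks hn hlen hrow s (hC s hs) with ⟨Ts, hstopS, hchar⟩
    cases hd : pvDGet (pvBfsDistances n blocks s) v.1 v.2 with
    | none =>
      exfalso
      have := (hchar v hv).1.1 hd
      rw [pvVp_iff_ever n blocks [s] Ts hstopS] at this
      exact this hev
    | some d => exact ⟨d, rfl⟩
  by_cases hev : pvEver n blocks C v
  · rcases pvFlvI_spec n blocks C v hev with ⟨dn, hflv, hfirst⟩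
    rw [hflv]
    have hmemge : ∀ x ∈ C.filterMap (fun s => pvDGet (pvBfsDistances n blocks s) v.1 v.2),
        (dn : Int) ≤ x := by
      intro x hx
      rcases List.mem_filterMap.1 hx with ⟨s, hs, hd⟩
      rcases hval s hs x hd with ⟨dn', rfl, hfirst'⟩
      have hmem : v ∈ pvRL n blocks C dn' :=
        (pvRL_single n blocks C dn' v).2 ⟨s, hs, hfirst'.1⟩
      have : dn ≤ dn' := by
        by_contra hlt
        exact hfirst.2 dn' (by omega) hmem
      exact_mod_cast this
    have hmem : (dn : Int) ∈ C.filterMap (fun s => pvDGet (pvBfsDistances n blocks s) v.1 v.2) := by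
      rcases (pvFirst_min n blocks C dn v hfirst).1 with ⟨s, hs, hfirstS⟩
      rcases hsome s hs ⟨dn, hfirstS.1⟩ with ⟨d, hd⟩
      rcases hval s hs d hd with ⟨dn'', hdeq, hfirst''⟩
      have : dn'' = dn := pvFirst_unique n blocks [s] dn'' dn v hfirst'' hfirstS
      subst this
      rw [hdeq] at hd
      exact List.mem_filterMap.2 ⟨s, hs, hd⟩
    have hfm := PySem.List.foldl_min_le
      (C.filterMap (fun s => pvDGet (pvBfsDistances n blocks s) v.1 v.2)) (1000000007 : Int)
    apply le_antisymm
    · exact le_min hfm.1 (hfm.2 _ hmem)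
    · exact pvFoldlMinLB _ _ _ (min_le_left _ _) (fun x hx => le_trans (min_le_right _ _)
        (hmemge x hx))
  · rw [pvFlvI_of_not_ever n blocks C v hev]
    have hnil : C.filterMap (fun s => pvDGet (pvBfsDistances n blocks s) v.1 v.2) = [] := by
      rw [List.filterMap_eq_nil_iff]
      intro s hs
      refine hnone s hs ?_
      intro hevS
      exact hev ((pvEver_union n blocks C v).2 ⟨s, hs, hevS⟩)
    rw [hnil]
    simp

-- ---------- one subset: A's BFS value = B's combined value ----------

theorem pvStep_eq (n : Int) (blocks : List (List Int)) (hn : 0 ≤ n)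
    (hlen : n ≤ (blocks.length : Int))
    (hrow : ∀ row ∈ blocks.take n.toNat, n ≤ (row.length : Int))
    (C : List (Int × Int)) (hC : ∀ p ∈ C, pvInR n p) (acc : Int)
    (hacc : acc ≤ 1000000007) :
    (match pvFstA n blocks C with
     | some t => min acc t
     | none => acc)
    = (if ((pvEmpties n blocks).foldl (fun sp v =>
          max sp ((C.map (pvBfsDistances n blocks)).foldl (fun cell g =>
            match pvDGet g v.1 v.2 with
            | some d => if d < cell then d else cell
            | none => cell) (1000000007 : Int))) (0 : Int)) < 1000000007
       then min acc ((pvEmpties n blocks).foldl (fun sp v =>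
          max sp ((C.map (pvBfsDistances n blocks)).foldl (fun cell g =>
            match pvDGet g v.1 v.2 with
            | some d => if d < cell then d else cell
            | none => cell) (1000000007 : Int))) (0 : Int))
       else acc) := by
  have hcell : ∀ v ∈ pvEmpties n blocks,
      ((C.map (pvBfsDistances n blocks)).foldl (fun cell g =>
        match pvDGet g v.1 v.2 with
        | some d => if d < cell then d else cell
        | none => cell) 1000000007) = min 1000000007 (pvFlvI n blocks C v) := by
    intro v hv
    exact pvCellVal n blocks hn hlen hrow C hC v ((mem_pvEmpties n blocks v).1 hv).1
  have hspread : ((pvEmpties n blocks).foldl (fun sp v =>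
        max sp ((C.map (pvBfsDistances n blocks)).foldl (fun cell g =>
          match pvDGet g v.1 v.2 with
          | some d => if d < cell then d else cell
          | none => cell) (1000000007 : Int))) (0 : Int))
      = (pvEmpties n blocks).foldl (fun sp v =>
          max sp (min 1000000007 (pvFlvI n blocks C v))) 0 := by
    apply PySem.List.foldl_congr_mem
    intro acc' v hv
    rw [hcell v hv]
  rcases pvFstA_char n blocks hn hlen hrow C hC with ⟨T, hstop, hsome, hnone⟩
  rw [hspread]
  by_cases hcov : ∀ v ∈ pvEmpties n blocks, pvVp n blocks C T v
  · simp only [hsome hcov]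
    have heq : pvTotSpec n blocks C T =
        (pvEmpties n blocks).foldl (fun sp v => max sp (pvFlvI n blocks C v)) 0 := by
      have hub := PySem.List.le_foldl_max_int (pvEmpties n blocks)
        (fun v => pvFlvI n blocks C v) 0
      apply le_antisymm
      · apply pvTotSpec_le n blocks C _ hub.1
        intro t' ht' hg
        rcases (pvNewEmptyB_iff n blocks C t').1 hg with ⟨v, hfirst, he⟩
        have hvin : pvInR n v := pvRL_inR n blocks C hC t' v hfirst.1
        have hvmem : v ∈ pvEmpties n blocks := (mem_pvEmpties n blocks v).2 ⟨hvin, he⟩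
        have := hub.2 v hvmem
        rwa [pvFlvI_of_first n blocks C t' v hfirst] at this
      · apply pvFoldlMaxLe _ _ _ _ (pvTotSpec_nonneg n blocks C T)
        intro v hv
        have hev : pvEver n blocks C v := by
          rcases hcov v hv with ⟨i, _, hmem⟩
          exact ⟨i, hmem⟩
        rcases pvFlvI_spec n blocks C v hev with ⟨dn, hflv, hfirst⟩
        rw [hflv]
        have hdT : dn < T := pvFirst_lt_stop n blocks C T dn hstop v hfirst
        have hg : pvNewEmptyB n blocks C dn = true :=
          (pvNewEmptyB_iff n blocks C dn).2 ⟨v, hfirst, ((mem_pvEmpties n blocks v).1 hv).2⟩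
        exact pvTotSpec_ge n blocks C dn T hdT hg
    by_cases hts : ((pvEmpties n blocks).foldl
        (fun sp v => max sp (pvFlvI n blocks C v)) 0) < 1000000007
    · have hcells : ∀ v ∈ pvEmpties n blocks,
          min 1000000007 (pvFlvI n blocks C v) = pvFlvI n blocks C v := by
        intro v hv
        have := (PySem.List.le_foldl_max_int (pvEmpties n blocks)
          (fun v => pvFlvI n blocks C v) 0).2 v hv
        exact min_eq_right (by omega)
      have hsp2 : ((pvEmpties n blocks).foldl (fun sp v =>
            max sp (min 1000000007 (pvFlvI n blocks C v))) 0)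
          = (pvEmpties n blocks).foldl (fun sp v => max sp (pvFlvI n blocks C v)) 0 := by
        apply PySem.List.foldl_congr_mem
        intro acc' v hv
        rw [hcells v hv]
      rw [hsp2, if_pos hts, heq]
    · have hsge : (1000000007 : Int) ≤ (pvEmpties n blocks).foldl (fun sp v =>
          max sp (min 1000000007 (pvFlvI n blocks C v))) 0 := by
        rcases pvFoldlMaxCases (fun v => pvFlvI n blocks C v) (pvEmpties n blocks) 0
          with h0 | ⟨v, hv, hveq⟩
        · rw [h0] at hts
          exact absurd (by norm_num) hts
        · have hge : (1000000007 : Int) ≤ pvFlvI n blocks C v := by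
            rw [← hveq]
            omega
          have := (PySem.List.le_foldl_max_int (pvEmpties n blocks)
            (fun v => min 1000000007 (pvFlvI n blocks C v)) 0).2 v hv
          rw [min_eq_left hge] at this
          exact this
      rw [if_neg (by omega), heq, min_eq_left (by omega)]
  · simp only [hnone hcov]
    push_neg at hcov
    rcases hcov with ⟨v, hv, hnvp⟩
    have hnev : ¬ pvEver n blocks C v := by
      rw [← pvVp_iff_ever n blocks C T hstop]
      exact hnvp
    have hval : min 1000000007 (pvFlvI n blocks C v) = 1000000007 := by
      rw [pvFlvI_of_not_ever n blocks C v hnev]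
      exact min_self _
    have hsge : (1000000007 : Int) ≤ (pvEmpties n blocks).foldl (fun sp v =>
        max sp (min 1000000007 (pvFlvI n blocks C v))) 0 := by
      have := (PySem.List.le_foldl_max_int (pvEmpties n blocks)
        (fun v => min 1000000007 (pvFlvI n blocks C v)) 0).2 v hv
      rw [hval] at this
      exact this
    rw [if_neg (by omega)]

-- ---------- the distance cache returns exactly the per-source BFS grids ----------

theorem pvGrids_spec (n : Int) (blocks : List (List Int)) :
    ∀ (chosen : List (Int × Int)) (cache : PySem.Dict (Int × Int) (List (List (Option Int))))
      (gs0 : List (List (List (Option Int)))),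
    (∀ s g, cache.get? s = some g → g = pvBfsDistances n blocks s) →
    (pvGrids n blocks (cache, gs0) chosen).2 = gs0 ++ chosen.map (pvBfsDistances n blocks) ∧
    (∀ s g, (pvGrids n blocks (cache, gs0) chosen).1.get? s = some g →
      g = pvBfsDistances n blocks s) := by
  intro chosen
  induction chosen with
  | nil =>
    intro cache gs0 hinv
    exact ⟨by simp [pvGrids], hinv⟩
  | cons s rest ih =>
    intro cache gs0 hinv
    cases hc : cache.get? s with
    | some g =>
      have hg : g = pvBfsDistances n blocks s := hinv s g hc
      have := ih cache (gs0 ++ [g]) hinv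
      simp only [pvGrids, List.foldl_cons, hc] at this ⊢
      refine ⟨?_, this.2⟩
      rw [this.1, hg]
      simp
    | none =>
      have hinv' : ∀ s' g', (cache.insert s (pvBfsDistances n blocks s)).get? s' = some g' →
          g' = pvBfsDistances n blocks s' := by
        intro s' g' hg'
        rw [PySem.Dict.get?_insert] at hg'
        split at hg'
        · rename_i hss
          cases hg'
          rw [hss]
        · exact hinv s' g' hg'
      have := ih (cache.insert s (pvBfsDistances n blocks s))
        (gs0 ++ [pvBfsDistances n blocks s]) hinv'
      simp only [pvGrids, List.foldl_cons, hc] at this ⊢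
      refine ⟨?_, this.2⟩
      rw [this.1]
      simp

-- ---------- the top-level folds agree ----------

theorem pvFoldTop (n : Int) (blocks : List (List Int)) (hn : 0 ≤ n)
    (hlen : n ≤ (blocks.length : Int))
    (hrow : ∀ row ∈ blocks.take n.toNat, n ≤ (row.length : Int)) :
    ∀ (l : List (List (Int × Int))),
    (∀ ch ∈ l, ∀ p ∈ ch, pvInR n p) →
    ∀ (cache : PySem.Dict (Int × Int) (List (List (Option Int)))) (acc : Int),
    (∀ s g, cache.get? s = some g → g = pvBfsDistances n blocks s) →
    acc ≤ 1000000007 →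
    l.foldl (fun acc ch => match pvFstA n blocks ch with
      | some t => min acc t
      | none => acc) acc
    = (l.foldl (fun (st : PySem.Dict (Int × Int) (List (List (Option Int))) × Int) chosen =>
        let cg := pvGrids n blocks (st.1, []) chosen
        let spread := (pvEmpties n blocks).foldl (fun sp v =>
          max sp (cg.2.foldl (fun cell g =>
            match pvDGet g v.1 v.2 with
            | some d => if d < cell then d else cell
            | none => cell) (1000000007 : Int))) (0 : Int)
        (cg.1, if spread < 1000000007 then min st.2 spread else st.2)) (cache, acc)).2 := by
  intro l
  induction l with
  | nil =>
    intro _ cache acc _ _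
    rfl
  | cons ch l ih =>
    intro hl cache acc hcache hacc
    simp only [List.foldl_cons]
    obtain ⟨hgs, hinv'⟩ := pvGrids_spec n blocks ch cache [] hcache
    rw [List.nil_append] at hgs
    have hstep := pvStep_eq n blocks hn hlen hrow ch (hl ch List.mem_cons_self) acc hacc
    rw [hstep]
    have hacc' : (if ((pvEmpties n blocks).foldl (fun sp v =>
          max sp ((ch.map (pvBfsDistances n blocks)).foldl (fun cell g =>
            match pvDGet g v.1 v.2 with
            | some d => if d < cell then d else cell
            | none => cell) (1000000007 : Int))) (0 : Int)) < 1000000007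
        then min acc ((pvEmpties n blocks).foldl (fun sp v =>
          max sp ((ch.map (pvBfsDistances n blocks)).foldl (fun cell g =>
            match pvDGet g v.1 v.2 with
            | some d => if d < cell then d else cell
            | none => cell) (1000000007 : Int))) (0 : Int))
        else acc) ≤ 1000000007 := by
      split
      · exact le_trans (min_le_left _ _) hacc
      · exact hacc
    have := ih (fun c hc => hl c (List.mem_cons_of_mem _ hc)) (pvGrids n blocks (cache, []) ch).1
      _ hinv' hacc'
    rw [this]
    simp only [hgs]

-- ===== VERDICT (by name: the statement is the Claim_ definition above) =====
theorem find_min_time_spec : Claim_equal_find_min_time := by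
  intro bm sc _ hpre
  unfold Spec_find_min_time find_min_time find_min_time_alt
  rcases hpre with ⟨hsc, hn, hlen, hrow, hsp⟩ | ⟨hsc, hlt⟩ | ⟨hsc0, hn0⟩
  · by_cases hgt : ((bm.2.2.length : Int)) < sc
    · rw [if_pos hgt, pvCombos_nil _ bm.2.2 sc.toNat (by omega)]
      rfl
    rw [if_neg hgt]
    have hl : ∀ ch ∈ pvCombos sc.toNat bm.2.2, ∀ p ∈ ch, pvInR bm.1 p := by
      intro ch hch p hp
      have := hsp p (pvCombos_mem _ bm.2.2 sc.toNat ch hch p hp)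
      exact ⟨this.1, this.2.1, this.2.2.1, this.2.2.2⟩
    have hfold := pvFoldTop bm.1 bm.2.1 hn hlen hrow (pvCombos sc.toNat bm.2.2) hl
      PySem.Dict.empty 1000000007
      (fun s g h => by rw [PySem.Dict.get?_empty] at h; cases h) (le_refl _)
    rw [hfold]
  · rw [if_pos (by omega : ((bm.2.2.length : Int)) < sc),
      pvCombos_nil _ bm.2.2 sc.toNat (by omega)]
    rfl
  · have h0 : sc.toNat = 0 := by omega
    rw [if_neg (by omega : ¬ ((bm.2.2.length : Int)) < sc), h0]
    have hA : pvFstA bm.1 bm.2.1 [] = some 0 := by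
      simp [pvFstA, pvBfsA_nil, pvCover, PySem.List.pyRange_one_eq_nil hn0]
    have hE : pvEmpties bm.1 bm.2.1 = [] := by
      simp [pvEmpties, PySem.List.pyRange_one_eq_nil hn0]
    simp [pvCombos, hA, hE, pvGrids]
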